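-- pv_equiv track=rewrite | github.com/jjungeun/Algo_study | python/exercise/Lv3/Solution6.py | solution
-- ===== SOURCE A (Python) =====
-- def counting(m, n, board, top):
-- 	count = [[0 for _ in range(n)] for _ in range(m)]
-- 	for c in range(1, n):
-- 		for r in range(top[c] + 1, m):
-- 			if board[r][c] == 'a':
-- 				continue
-- 			block = 1 if board[r-1][c-1] == board[r][c] else 0
-- 			block += 1 if board[r-1][c] == board[r][c] else 0
-- 			block += 1 if board[r][c-1] == board[r][c] else 0
-- 			count[r][c] = block
-- 			if block == 3:
-- 				count[r-1][c-1] = 3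
-- 				count[r-1][c] = 3
-- 				count[r][c-1] = 3
-- 	return count
--
-- def poping(m, n, count, board, top):
-- 	new_col = ["" for _ in range(n)]
-- 	for c in range(n):
-- 		tmp_col = ""
-- 		for r in range(top[c], m):
-- 			if count[r][c] == 3:
-- 				top[c] += 1
-- 			else:
-- 				tmp_col += board[r][c]
-- 		new_col[c] = "a" * top[c] + tmp_col
-- 	new_board = ["" for _ in range(m)]
-- 	for c in range(n):
-- 		for r in range(m):
-- 			new_board[r] += new_col[c][r]
-- 	return new_board
--
-- def isdone(m, n, count):
-- 	for r in range(m):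
-- 		for c in range(n):
-- 			if count[r][c] == 3:
-- 				return False
-- 	return True
--
-- def solution(m, n, board):
-- 	answer = 0
-- 	top = [0 for _ in range(n)]
-- 	while True:
-- 		count = counting(m, n, board, top)
-- 		if isdone(m, n, count):
-- 			break
-- 		board = poping(m, n, count, board, top)
-- 	return sum(top)
-- ===== SOURCE B (Python) =====
-- def solution(m, n, board):
--     # Bottom-aligned stacks of cells (no empty padding): deleting matched cells IS gravity,
--     # so there is no separate fall step.  A literal 'a' cell is an ordinary cell that never matches.
--     stacks = [list(reversed([board[r][c] for r in range(m)])) for c in range(n)]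
--     removed = 0
--     while True:
--         marked = set()
--         for c in range(n - 1):
--             for h in range(min(len(stacks[c]), len(stacks[c + 1])) - 1):
--                 v = stacks[c][h]
--                 if v != 'a' and stacks[c][h + 1] == v and stacks[c + 1][h] == v and stacks[c + 1][h + 1] == v:
--                     marked.add((c, h))
--                     marked.add((c, h + 1))
--                     marked.add((c + 1, h))
--                     marked.add((c + 1, h + 1))
--         if not marked:
--             return removed
--         for c in range(n):
--             new = [stacks[c][h] for h in range(len(stacks[c])) if (c, h) not in marked]
--             removed += len(stacks[c]) - len(new)
--             stacks[c] = new
-- ===== Notes on version B (the rewrite author's own statement) =====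
-- stated objective: alternative
-- what changed: B drops A's full-grid simulation entirely: each column is a bottom-aligned stack of its cells with no empty padding, a 2x2 match is detected by equal characters at the same two heights of adjacent stacks, and removal is plain deletion from the stacks, so A's gravity/fall pass disappears (deleting from a bottom-aligned stack IS gravity).
-- outside the precondition, e.g. on solution(2, 1, []): A returns 0, B raises IndexError; on solution(1, 3, ['x']): A returns 0, B raises IndexError
import Mathlib
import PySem

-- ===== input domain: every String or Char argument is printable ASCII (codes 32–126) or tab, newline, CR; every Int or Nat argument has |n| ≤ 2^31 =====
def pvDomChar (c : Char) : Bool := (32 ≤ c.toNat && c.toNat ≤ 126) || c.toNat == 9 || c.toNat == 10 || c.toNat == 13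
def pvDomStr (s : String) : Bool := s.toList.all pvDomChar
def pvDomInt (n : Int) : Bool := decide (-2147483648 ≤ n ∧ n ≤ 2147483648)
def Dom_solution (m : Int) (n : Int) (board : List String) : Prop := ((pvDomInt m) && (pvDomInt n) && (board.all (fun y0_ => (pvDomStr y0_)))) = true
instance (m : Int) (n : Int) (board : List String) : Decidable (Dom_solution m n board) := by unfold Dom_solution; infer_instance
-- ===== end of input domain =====

-- B drops A's full-grid simulation: each column is a bottom-aligned stack of its cells with no
-- empty padding; a 2x2 match is equal characters at the same two heights of adjacent stks, and
-- removal is plain deletion from the stks, so there is no separate gravity pass (objective: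
-- alternative, same cost).  Strings are ported as List Char throughout; no observable mutation.

-- ===== PORT A =====
-- board cell read board[r][c] (rows as char lists); default never reached on Pre_ inputs
def aCell (rows : List (List Char)) (r c : Int) : Char :=
  PySem.List.pyGetD (PySem.List.pyGetD rows r []) c ' '

-- count[r][c] read / write
def aGet2 (count : List (List Int)) (r c : Int) : Int :=
  PySem.List.pyGetD (PySem.List.pyGetD count r []) c 0

def aSet2 (count : List (List Int)) (r c : Int) (v : Int) : List (List Int) :=
  PySem.List.pySetD count r (PySem.List.pySetD (PySem.List.pyGetD count r []) c v)

-- [[0 for _ in range(n)] for _ in range(m)]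
def count0 (m n : Int) : List (List Int) :=
  (PySem.List.pyRange 0 m 1).map (fun _ => (PySem.List.pyRange 0 n 1).map (fun _ => (0 : Int)))

def counting (m n : Int) (rows : List (List Char)) (top : List Int) : List (List Int) :=
  (PySem.List.pyRange 1 n 1).foldl (fun count c =>
    (PySem.List.pyRange (PySem.List.pyGetD top c 0 + 1) m 1).foldl (fun count r =>
      if aCell rows r c = 'a' then count
      else
        let block : Int :=
          (if aCell rows (r-1) (c-1) = aCell rows r c then 1 else 0)
          + (if aCell rows (r-1) c = aCell rows r c then 1 else 0)
          + (if aCell rows r (c-1) = aCell rows r c then 1 else 0)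
        let count1 := aSet2 count r c block
        if block = 3 then
          aSet2 (aSet2 (aSet2 count1 (r-1) (c-1) 3) (r-1) c 3) r (c-1) 3
        else count1) count)
    (count0 m n)

-- poping mutates top in Python; the port returns (new_board, new_top)
def poping (m n : Int) (count : List (List Int)) (rows : List (List Char)) (top : List Int) :
    List (List Char) × List Int :=
  let st := (PySem.List.pyRange 0 n 1).foldl (fun (st : List Int × List (List Char)) c =>
      let p := (PySem.List.pyRange (PySem.List.pyGetD st.1 c 0) m 1).foldl
        (fun (p : Int × List Char) r =>
          if aGet2 count r c = 3 then (p.1 + 1, p.2)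
          else (p.1, p.2 ++ [aCell rows r c])) (PySem.List.pyGetD st.1 c 0, ([] : List Char))
      (PySem.List.pySetD st.1 c p.1,
       PySem.List.pySetD st.2 c (PySem.List.pyRepeat ['a'] p.1 ++ p.2)))
    (top, (PySem.List.pyRange 0 n 1).map (fun _ => ([] : List Char)))
  ((PySem.List.pyRange 0 n 1).foldl (fun nb c =>
      (PySem.List.pyRange 0 m 1).foldl (fun nb r =>
        PySem.List.pySetD nb r
          (PySem.List.pyGetD nb r [] ++ [PySem.List.pyGetD (PySem.List.pyGetD st.2 c []) r ' '])) nb)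
    ((PySem.List.pyRange 0 m 1).map (fun _ => ([] : List Char))), st.1)

def isdone (m n : Int) (count : List (List Int)) : Bool :=
  (PySem.List.pyRange 0 m 1).all (fun r =>
    (PySem.List.pyRange 0 n 1).all (fun c => !(aGet2 count r c == 3)))

-- the while-True loop; fuel only makes it total (each non-final round strictly grows sum(top))
def loopA (m n : Int) : Nat → List (List Char) → List Int → Int
  | 0, _, top => top.sum
  | fuel+1, rows, top =>
    let count := counting m n rows top
    if isdone m n count then top.sum
    else
      let st := poping m n count rows top
      loopA m n fuel st.1 st.2

def solution (m : Int) (n : Int) (board : List String) : Int :=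
  loopA m n (m.toNat * n.toNat + 1) (board.map (fun s => s.toList))
    ((PySem.List.pyRange 0 n 1).map (fun _ => (0 : Int)))

-- ===== PORT B =====
-- stks[c][h] (column stacks, bottom-up); the default is never reached on Pre_ inputs
def sGet (stks : List (List Char)) (c h : Int) : Char :=
  PySem.List.pyGetD (PySem.List.pyGetD stks c []) h '?'

-- len(stks[c])
def sLen (stks : List (List Char)) (c : Int) : Int :=
  ((PySem.List.pyGetD stks c []).length : Int)

-- the marked set of one round: all cells of matched 2x2 windows, as (column, height) pairs
def bMarked (n : Int) (stks : List (List Char)) : PySem.Set (Int × Int) :=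
  (PySem.List.pyRange 0 (n-1) 1).foldl (fun s c =>
    (PySem.List.pyRange 0 (min (sLen stks c) (sLen stks (c+1)) - 1) 1).foldl (fun s h =>
      if sGet stks c h ≠ 'a' ∧ sGet stks c (h+1) = sGet stks c h
          ∧ sGet stks (c+1) h = sGet stks c h ∧ sGet stks (c+1) (h+1) = sGet stks c h then
        PySem.Set.add (PySem.Set.add (PySem.Set.add (PySem.Set.add s (c, h)) (c, h+1)) (c+1, h)) (c+1, h+1)
      else s) s) PySem.Set.empty

-- one column update: delete marked heights, count the deletions
def bStep (mk : List (Int × Int)) (st : List (List Char) × Int) (c : Int) :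
    List (List Char) × Int :=
  let nw := ((PySem.List.pyRange 0 (sLen st.1 c) 1).filter
      (fun h => !(decide ((c, h) ∈ mk)))).map (fun h => sGet st.1 c h)
  (PySem.List.pySetD st.1 c nw, st.2 + (sLen st.1 c - (nw.length : Int)))

def loopB (n : Int) : Nat → List (List Char) → Int → Int
  | 0, _, removed => removed
  | fuel+1, stks, removed =>
    let mk := bMarked n stks
    if mk = [] then removed
    else
      let st := (PySem.List.pyRange 0 n 1).foldl (bStep mk) (stks, removed)
      loopB n fuel st.1 st.2

def solution_alt (m : Int) (n : Int) (board : List String) : Int :=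
  loopB n (m.toNat * n.toNat + 1)
    ((PySem.List.pyRange 0 n 1).map (fun c =>
      ((PySem.List.pyRange 0 m 1).map (fun r =>
        PySem.List.pyGetD (PySem.List.pyGetD board r "").toList c ' ')).reverse)) 0

-- ===== PRECONDITION & SPEC =====
-- Pre_ requires the board to contain the full m×n grid whenever m > 0 and n > 0.  Both Pythons
-- raise IndexError on undersized boards, except that A happens to return 0 on some of them only
-- because its scan (empty for m ≤ 1 or n ≤ 1, and skipping neighbours of 'a' cells) never
-- dereferences the missing cells, while B's grid construction reads every cell; those accidental
-- returns of A are excluded here.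
def Pre_solution (m : Int) (n : Int) (board : List String) : Prop :=
  0 < m → 0 < n →
    (m ≤ (board.length : Int) ∧ ∀ s ∈ board.take m.toNat, n ≤ (s.toList.length : Int))
instance (m : Int) (n : Int) (board : List String) : Decidable (Pre_solution m n board) := by
  unfold Pre_solution; infer_instance

def pvWitness_solution : Int × Int × List String := (2, 2, ["bc", "dc"])

def Spec_solution (m : Int) (n : Int) (board : List String) (out : Int) : Prop := out = solution_alt m n board
instance (m : Int) (n : Int) (board : List String) (out : Int) : Decidable (Spec_solution m n board out) := by unfold Spec_solution; infer_instance

-- ===== CLAIM (what is proved, stated in full; the proofs are below) =====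
def Claim_equal_solution : Prop := ∀ (m : Int) (n : Int) (board : List String), Dom_solution m n board → Pre_solution m n board → Spec_solution m n board (solution m n board)

-- ===== LEMMAS AND PROOFS =====

-- the value A's `block` computes at (r, c)
def blockv (rows : List (List Char)) (r c : Int) : Int :=
  (if aCell rows (r-1) (c-1) = aCell rows r c then 1 else 0)
  + (if aCell rows (r-1) c = aCell rows r c then 1 else 0)
  + (if aCell rows r (c-1) = aCell rows r c then 1 else 0)

-- one iteration of A's counting loop, as a function of the pair (c, r)
def cstep (rows : List (List Char)) (count : List (List Int)) (p : Int × Int) : List (List Int) :=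
  if aCell rows p.2 p.1 = 'a' then count
  else
    let count1 := aSet2 count p.2 p.1 (blockv rows p.2 p.1)
    if blockv rows p.2 p.1 = 3 then
      aSet2 (aSet2 (aSet2 count1 (p.2-1) (p.1-1) 3) (p.2-1) p.1 3) p.2 (p.1-1) 3
    else count1

-- the iteration sequence of counting, column-major
def citers (m n : Int) (top : List Int) : List (Int × Int) :=
  (PySem.List.pyRange 1 n 1).flatMap (fun c =>
    (PySem.List.pyRange (PySem.List.pyGetD top c 0 + 1) m 1).map (fun r => (c, r)))

def pairLt (p q : Int × Int) : Prop := p.1 < q.1 ∨ (p.1 = q.1 ∧ p.2 < q.2)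

-- a full 2x2 match with bottom-right corner (r, c)
abbrev Mb (rows : List (List Char)) (r c : Int) : Prop :=
  aCell rows r c ≠ 'a' ∧ blockv rows r c = 3

def MW (m n : Int) (rows : List (List Char)) (r c : Int) : Prop :=
  1 ≤ r ∧ r < m ∧ 1 ≤ c ∧ c < n ∧ Mb rows r c

-- cell (i, j) belongs to some matched 2x2 window
def remP (m n : Int) (rows : List (List Char)) (i j : Int) : Prop :=
  MW m n rows i j ∨ MW m n rows i (j+1) ∨ MW m n rows (i+1) j ∨ MW m n rows (i+1) (j+1)

-- the value count[i][j] holds after the iterations in L have run (last write wins)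
def specVal (rows : List (List Char)) (L : List (Int × Int)) (i j : Int) : Int :=
  if (j+1, i+1) ∈ L ∧ Mb rows (i+1) (j+1) then 3
  else if (j+1, i) ∈ L ∧ Mb rows i (j+1) then 3
  else if (j, i+1) ∈ L ∧ Mb rows (i+1) j then 3
  else if (j, i) ∈ L then (if aCell rows i j = 'a' then 0 else blockv rows i j)
  else 0

def Shape2 (count : List (List Int)) (m n : Int) : Prop :=
  count.length = m.toNat ∧ ∀ row ∈ count, row.length = n.toNat

-- A-state / B-state correspondence: B's stack for column c is exactly the column's cells below
-- A's top counter, read bottom-up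
def StInv (m n : Int) (rows : List (List Char)) (top : List Int) (stks : List (List Char))
    (removed : Int) : Prop :=
  top.length = n.toNat ∧
  (∀ c : Int, 0 ≤ c → c < n →
    0 ≤ PySem.List.pyGetD top c 0 ∧ PySem.List.pyGetD top c 0 ≤ max m 0) ∧
  (∀ c r : Int, 0 ≤ c → c < n → 0 ≤ r → r < PySem.List.pyGetD top c 0 → aCell rows r c = 'a') ∧
  n ≤ (stks.length : Int) ∧
  (∀ c : Int, 0 ≤ c → c < n →
    (PySem.List.pyGetD stks c []).length = (m - PySem.List.pyGetD top c 0).toNat) ∧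
  (∀ c h : Int, 0 ≤ c → c < n → 0 ≤ h → h < m - PySem.List.pyGetD top c 0 →
    sGet stks c h = aCell rows (m-1-h) c) ∧
  removed = top.sum

theorem shape2_count0 (m n : Int) : Shape2 (count0 m n) m n := by
  constructor
  · simp [count0, PySem.List.length_pyRange_one]
  · intro row hrow
    rcases List.mem_map.mp hrow with ⟨_, _, rfl⟩
    simp [PySem.List.length_pyRange_one]

theorem aGet2_count0 (m n i j : Int) (hi : 0 ≤ i) (hi2 : i < m) (hj : 0 ≤ j) (hj2 : j < n) :
    aGet2 (count0 m n) i j = 0 := by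
  unfold aGet2 count0
  rw [PySem.List.pyGetD_map_pyRange_of_nonneg _ m i _ hi hi2,
    PySem.List.pyGetD_map_pyRange_of_nonneg _ n j _ hj hj2]

theorem shape2_aSet2 (count : List (List Int)) (m n r c v : Int) (hs : Shape2 count m n)
    (hr : 0 ≤ r) (hr2 : r < m) (hc : 0 ≤ c) (hc2 : c < n) :
    Shape2 (aSet2 count r c v) m n := by
  obtain ⟨h1, h2⟩ := hs
  unfold aSet2
  rw [PySem.List.pySetD_of_nonneg _ _ hr]
  refine ⟨by simpa using h1, ?_⟩
  intro row hrow
  rcases List.mem_or_eq_of_mem_set hrow with h | rfl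
  · exact h2 _ h
  · rw [PySem.List.pySetD_of_nonneg _ _ hc]
    rw [List.length_set]
    apply h2
    rw [PySem.List.pyGetD_eq_getElem _ _ hr (by omega)]
    exact List.getElem_mem _

theorem aGet2_aSet2 (count : List (List Int)) (m n r c i j v : Int) (hs : Shape2 count m n)
    (hr : 0 ≤ r) (hr2 : r < m) (hc : 0 ≤ c) (hc2 : c < n)
    (hi : 0 ≤ i) (hi2 : i < m) (hj : 0 ≤ j) (hj2 : j < n) :
    aGet2 (aSet2 count r c v) i j = if i = r ∧ j = c then v else aGet2 count i j := by
  obtain ⟨h1, h2⟩ := hs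
  have hrl : r < (count.length : Int) := by omega
  have hil : i < (count.length : Int) := by omega
  have hrowlen : (PySem.List.pyGetD count r []).length = n.toNat := by
    rw [PySem.List.pyGetD_eq_getElem _ _ hr hrl]
    exact h2 _ (List.getElem_mem _)
  unfold aGet2 aSet2
  rw [PySem.List.pySetD_of_nonneg _ _ hr,
    PySem.List.pyGetD_eq_getElem (count.set r.toNat _) ([] : List Int) hi (by simpa using hil),
    List.getElem_set]
  by_cases hir : r.toNat = i.toNat
  · have hir' : i = r := by omega
    rw [if_pos hir]
    rw [PySem.List.pySetD_of_nonneg _ _ hc]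
    have hjl : j.toNat < ((PySem.List.pyGetD count r []).set c.toNat v).length := by
      rw [List.length_set, hrowlen]; omega
    rw [PySem.List.pyGetD_eq_getElem _ (0 : Int) hj (by rw [List.length_set] at hjl ⊢; exact_mod_cast by omega : j < (((PySem.List.pyGetD count r []).set c.toNat v).length : Int)),
      List.getElem_set]
    by_cases hjc : c.toNat = j.toNat
    · have : j = c := by omega
      simp [hir', this]
    · have hne : ¬ (i = r ∧ j = c) := by intro h; exact hjc (by omega)
      rw [if_neg hjc, if_neg hne, hir']
      rw [PySem.List.pyGetD_eq_getElem _ (0 : Int) hj (by omega : j < ((PySem.List.pyGetD count r []).length : Int))]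
  · have hne : ¬ (i = r ∧ j = c) := by intro h; exact hir (by omega)
    rw [if_neg hir, if_neg hne]
    rw [PySem.List.pyGetD_eq_getElem count ([] : List Int) hi hil]

theorem blockv_eq_three_iff (rows : List (List Char)) (r c : Int) :
    blockv rows r c = 3 ↔
      aCell rows (r-1) (c-1) = aCell rows r c ∧ aCell rows (r-1) c = aCell rows r c
        ∧ aCell rows r (c-1) = aCell rows r c := by
  unfold blockv; split_ifs <;> simp_all

theorem counting_eq_foldl (m n : Int) (rows : List (List Char)) (top : List Int) :
    counting m n rows top = (citers m n top).foldl (cstep rows) (count0 m n) := by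
  unfold counting citers
  rw [List.foldl_flatMap]
  simp only [List.foldl_map, cstep, blockv]

theorem mem_citers (m n : Int) (top : List Int) (p : Int × Int) :
    p ∈ citers m n top ↔
      1 ≤ p.1 ∧ p.1 < n ∧ PySem.List.pyGetD top p.1 0 + 1 ≤ p.2 ∧ p.2 < m := by
  unfold citers
  constructor
  · intro h
    rcases List.mem_flatMap.mp h with ⟨c, hc, hp⟩
    rcases List.mem_map.mp hp with ⟨r, hr, rfl⟩
    rcases PySem.List.mem_pyRange_one.mp hc with ⟨h1, h2⟩
    rcases PySem.List.mem_pyRange_one.mp hr with ⟨h3, h4⟩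
    exact ⟨h1, h2, by simpa using h3, h4⟩
  · rintro ⟨h1, h2, h3, h4⟩
    exact List.mem_flatMap.mpr ⟨p.1, PySem.List.mem_pyRange_one.mpr ⟨h1, h2⟩,
      List.mem_map.mpr ⟨p.2, PySem.List.mem_pyRange_one.mpr ⟨by omega, h4⟩, rfl⟩⟩

theorem pairwise_citers (m n : Int) (top : List Int) : (citers m n top).Pairwise pairLt := by
  unfold citers
  have H : ∀ l : List Int, l.Pairwise (· < ·) →
      (l.flatMap (fun c =>
        (PySem.List.pyRange (PySem.List.pyGetD top c 0 + 1) m 1).map (fun r => (c, r)))).Pairwise pairLt := by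
    intro l hl
    induction l with
    | nil => simp
    | cons x xs ih =>
      rcases List.pairwise_cons.mp hl with ⟨hx, hxs⟩
      rw [List.flatMap_cons]
      refine List.pairwise_append.mpr ⟨?_, ih hxs, ?_⟩
      · exact List.Pairwise.map _ (fun a b hab => Or.inr ⟨rfl, hab⟩)
          (PySem.List.pairwise_lt_pyRange_one _ m)
      · intro a ha b hb
        rcases List.mem_map.mp ha with ⟨r, _, rfl⟩
        rcases List.mem_flatMap.mp hb with ⟨c', hc', hb'⟩
        rcases List.mem_map.mp hb' with ⟨r', _, rfl⟩
        exact Or.inl (hx c' hc')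
  exact H _ (PySem.List.pairwise_lt_pyRange_one 1 n)

theorem pairLt_j1i1_not (l : List (Int × Int)) (i j : Int)
    (hlt : ∀ z ∈ l, pairLt z (j+1, i)) : ((j+1, i+1) : Int × Int) ∉ l := by
  intro h
  have := hlt _ h
  unfold pairLt at this
  simp only [Prod.mk.injEq] at this
  omega

theorem specVal_append_notrel (rows : List (List Char)) (l : List (Int × Int)) (x : Int × Int)
    (i j : Int) (h1 : x ≠ (j+1, i+1)) (h2 : x ≠ (j+1, i)) (h3 : x ≠ (j, i+1)) (h4 : x ≠ (j, i)) :
    specVal rows (l ++ [x]) i j = specVal rows l i j := by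
  unfold specVal
  simp [List.mem_append, List.mem_singleton, Ne.symm h1, Ne.symm h2, Ne.symm h3, Ne.symm h4]

theorem specVal_append_a (rows : List (List Char)) (l : List (Int × Int)) (i j : Int) :
    specVal rows (l ++ [(j+1, i+1)]) i j
      = if Mb rows (i+1) (j+1) then 3 else specVal rows l i j := by
  have n2 : ((j+1, i) : Int × Int) ≠ (j+1, i+1) := by
    simp only [ne_eq, Prod.mk.injEq, not_and]; intro _; omega
  have n3 : ((j, i+1) : Int × Int) ≠ (j+1, i+1) := by
    simp only [ne_eq, Prod.mk.injEq, not_and]; intro h; omega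
  have n4 : ((j, i) : Int × Int) ≠ (j+1, i+1) := by
    simp only [ne_eq, Prod.mk.injEq, not_and]; intro h; omega
  unfold specVal
  by_cases hMb : Mb rows (i+1) (j+1)
  · rw [if_pos ⟨by simp, hMb⟩, if_pos hMb]
  · rw [if_neg (fun h => hMb h.2), if_neg hMb]
    simp [List.mem_append, List.mem_singleton, n2, n3, n4, hMb]

theorem specVal_append_b (rows : List (List Char)) (l : List (Int × Int)) (i j : Int)
    (hlt : ∀ z ∈ l, pairLt z (j+1, i)) :
    specVal rows (l ++ [(j+1, i)]) i j
      = if Mb rows i (j+1) then 3 else specVal rows l i j := by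
  have h11 : ((j+1, i+1) : Int × Int) ∉ l := pairLt_j1i1_not l i j hlt
  have h11x : ((j+1, i+1) : Int × Int) ≠ (j+1, i) := by
    simp only [ne_eq, Prod.mk.injEq, not_and]; intro _; omega
  have n3 : ((j, i+1) : Int × Int) ≠ (j+1, i) := by
    simp only [ne_eq, Prod.mk.injEq, not_and]; intro h; omega
  have n4 : ((j, i) : Int × Int) ≠ (j+1, i) := by
    simp only [ne_eq, Prod.mk.injEq, not_and]; intro h; omega
  unfold specVal
  by_cases hMb : Mb rows i (j+1)
  · simp only [List.mem_append, List.mem_singleton]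
    rw [if_neg (fun h => by
        rcases h.1 with hm | hm
        · exact h11 hm
        · exact h11x hm),
      if_pos ⟨Or.inr trivial, hMb⟩, if_pos hMb]
  · simp [List.mem_append, hMb, h11, h11x, n3, n4]

theorem specVal_append_c (rows : List (List Char)) (l : List (Int × Int)) (i j : Int)
    (hlt : ∀ z ∈ l, pairLt z (j, i+1)) :
    specVal rows (l ++ [(j, i+1)]) i j
      = if Mb rows (i+1) j then 3 else specVal rows l i j := by
  have h1 : ((j+1, i+1) : Int × Int) ∉ l := by
    intro h; have := hlt _ h; unfold pairLt at this
    simp only [Prod.mk.injEq] at this; omega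
  have h2 : ((j+1, i) : Int × Int) ∉ l := by
    intro h; have := hlt _ h; unfold pairLt at this
    simp only [Prod.mk.injEq] at this; omega
  have h1x : ((j+1, i+1) : Int × Int) ≠ (j, i+1) := by
    simp only [ne_eq, Prod.mk.injEq, not_and]; intro h; omega
  have h2x : ((j+1, i) : Int × Int) ≠ (j, i+1) := by
    simp only [ne_eq, Prod.mk.injEq, not_and]; intro h; omega
  have n4 : ((j, i) : Int × Int) ≠ (j, i+1) := by
    simp only [ne_eq, Prod.mk.injEq, not_and]; intro _; omega
  unfold specVal
  by_cases hMb : Mb rows (i+1) j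
  · simp only [List.mem_append, List.mem_singleton]
    rw [if_neg (fun h => by
        rcases h.1 with hm | hm
        · exact h1 hm
        · exact h1x hm),
      if_neg (fun h => by
        rcases h.1 with hm | hm
        · exact h2 hm
        · exact h2x hm),
      if_pos ⟨Or.inr trivial, hMb⟩, if_pos hMb]
  · simp [List.mem_append, hMb, h1, h2, h1x, h2x, n4]

theorem specVal_append_d (rows : List (List Char)) (l : List (Int × Int)) (i j : Int)
    (hlt : ∀ z ∈ l, pairLt z (j, i)) :
    specVal rows (l ++ [(j, i)]) i j
        = (if aCell rows i j = 'a' then 0 else blockv rows i j)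
      ∧ specVal rows l i j = 0 := by
  have h1 : ((j+1, i+1) : Int × Int) ∉ l := by
    intro h; have := hlt _ h; unfold pairLt at this
    simp only [Prod.mk.injEq] at this; omega
  have h2 : ((j+1, i) : Int × Int) ∉ l := by
    intro h; have := hlt _ h; unfold pairLt at this
    simp only [Prod.mk.injEq] at this; omega
  have h3 : ((j, i+1) : Int × Int) ∉ l := by
    intro h; have := hlt _ h; unfold pairLt at this
    simp only [Prod.mk.injEq] at this; omega
  have h4 : ((j, i) : Int × Int) ∉ l := by
    intro h; have := hlt _ h; unfold pairLt at this
    simp only [Prod.mk.injEq] at this; omega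
  have h1x : ((j+1, i+1) : Int × Int) ≠ (j, i) := by
    simp only [ne_eq, Prod.mk.injEq, not_and]; intro h; omega
  have h2x : ((j+1, i) : Int × Int) ≠ (j, i) := by
    simp only [ne_eq, Prod.mk.injEq, not_and]; intro h; omega
  have h3x : ((j, i+1) : Int × Int) ≠ (j, i) := by
    simp only [ne_eq, Prod.mk.injEq, not_and]; intro _; omega
  constructor
  · unfold specVal
    simp [List.mem_append, h1, h2, h3, h1x, h2x, h3x]
  · unfold specVal
    simp [h1, h2, h3, h4]

theorem shape2_cstep (rows : List (List Char)) (m n : Int) (C : List (List Int)) (x : Int × Int)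
    (hs : Shape2 C m n) (hc1 : 1 ≤ x.1) (hc2 : x.1 < n) (hr1 : 1 ≤ x.2) (hr2 : x.2 < m) :
    Shape2 (cstep rows C x) m n := by
  unfold cstep
  split_ifs
  · exact hs
  · exact shape2_aSet2 _ m n _ _ _
      (shape2_aSet2 _ m n _ _ _
        (shape2_aSet2 _ m n _ _ _
          (shape2_aSet2 _ m n _ _ _ hs (by omega) (by omega) (by omega) (by omega))
          (by omega) (by omega) (by omega) (by omega))
        (by omega) (by omega) (by omega) (by omega))
      (by omega) (by omega) (by omega) (by omega)
  · exact shape2_aSet2 _ m n _ _ _ hs (by omega) (by omega) (by omega) (by omega)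

theorem foldl_cstep_spec (rows : List (List Char)) (m n : Int) (L : List (Int × Int))
    (hok : ∀ p ∈ L, 1 ≤ p.1 ∧ p.1 < n ∧ 1 ≤ p.2 ∧ p.2 < m)
    (hsort : L.Pairwise pairLt) :
    Shape2 (L.foldl (cstep rows) (count0 m n)) m n ∧
      ∀ i j : Int, 0 ≤ i → i < m → 0 ≤ j → j < n →
        aGet2 (L.foldl (cstep rows) (count0 m n)) i j = specVal rows L i j := by
  induction L using List.reverseRecOn with
  | nil =>
    refine ⟨shape2_count0 m n, ?_⟩
    intro i j hi hi2 hj hj2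
    rw [List.foldl_nil, aGet2_count0 m n i j hi hi2 hj hj2]
    unfold specVal
    simp
  | append_singleton l x ih =>
    have hok' : ∀ p ∈ l, 1 ≤ p.1 ∧ p.1 < n ∧ 1 ≤ p.2 ∧ p.2 < m :=
      fun p hp => hok p (List.mem_append_left _ hp)
    have hsp := List.pairwise_append.mp hsort
    have hlt : ∀ z ∈ l, pairLt z x :=
      fun z hz => hsp.2.2 z hz x (List.mem_singleton_self x)
    obtain ⟨ihs, ihv⟩ := ih hok' hsp.1
    obtain ⟨hx1, hx2, hx3, hx4⟩ := hok x (List.mem_append_right _ (List.mem_singleton_self x))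
    rw [List.foldl_append, List.foldl_cons, List.foldl_nil]
    refine ⟨shape2_cstep rows m n _ x ihs hx1 hx2 hx3 hx4, ?_⟩
    intro i j hi hi2 hj hj2
    obtain ⟨cx, rx⟩ := x
    simp only at hx1 hx2 hx3 hx4
    set C := l.foldl (cstep rows) (count0 m n) with hC
    have s1 : Shape2 (aSet2 C rx cx (blockv rows rx cx)) m n :=
      shape2_aSet2 _ m n _ _ _ ihs (by omega) (by omega) (by omega) (by omega)
    have s2 : Shape2 (aSet2 (aSet2 C rx cx (blockv rows rx cx)) (rx-1) (cx-1) 3) m n :=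
      shape2_aSet2 _ m n _ _ _ s1 (by omega) (by omega) (by omega) (by omega)
    have s3 : Shape2 (aSet2 (aSet2 (aSet2 C rx cx (blockv rows rx cx)) (rx-1) (cx-1) 3)
        (rx-1) cx 3) m n :=
      shape2_aSet2 _ m n _ _ _ s2 (by omega) (by omega) (by omega) (by omega)
    by_cases e1 : j+1 = cx ∧ i+1 = rx
    · obtain ⟨rfl, rfl⟩ := e1
      rw [specVal_append_a rows l i j]
      show aGet2 (cstep rows C (j+1, i+1)) i j = _
      unfold cstep
      simp only
      by_cases hA : aCell rows (i+1) (j+1) = 'a'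
      · rw [if_pos hA, if_neg (fun h => h.1 hA)]
        exact ihv i j hi hi2 hj hj2
      · rw [if_neg hA]
        by_cases hB : blockv rows (i+1) (j+1) = 3
        · rw [if_pos hB, if_pos ⟨hA, hB⟩]
          rw [aGet2_aSet2 _ m n _ _ i j _ s3 (by omega) (by omega) (by omega) (by omega)
              hi hi2 hj hj2, if_neg (by omega),
            aGet2_aSet2 _ m n _ _ i j _ s2 (by omega) (by omega) (by omega) (by omega)
              hi hi2 hj hj2, if_neg (by omega),
            aGet2_aSet2 _ m n _ _ i j _ s1 (by omega) (by omega) (by omega) (by omega)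
              hi hi2 hj hj2, if_pos (by omega)]
        · rw [if_neg hB, if_neg (fun h => hB h.2)]
          rw [aGet2_aSet2 _ m n _ _ i j _ ihs (by omega) (by omega) (by omega) (by omega)
              hi hi2 hj hj2, if_neg (by omega)]
          exact ihv i j hi hi2 hj hj2
    · by_cases e2 : j+1 = cx ∧ i = rx
      · obtain ⟨rfl, rfl⟩ := e2
        rw [specVal_append_b rows l i j hlt]
        show aGet2 (cstep rows C (j+1, i)) i j = _
        unfold cstep
        simp only
        by_cases hA : aCell rows i (j+1) = 'a'
        · rw [if_pos hA, if_neg (fun h => h.1 hA)]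
          exact ihv i j hi hi2 hj hj2
        · rw [if_neg hA]
          by_cases hB : blockv rows i (j+1) = 3
          · rw [if_pos hB, if_pos ⟨hA, hB⟩]
            rw [aGet2_aSet2 _ m n _ _ i j _ s3 (by omega) (by omega) (by omega) (by omega)
                hi hi2 hj hj2, if_pos (by omega)]
          · rw [if_neg hB, if_neg (fun h => hB h.2)]
            rw [aGet2_aSet2 _ m n _ _ i j _ ihs (by omega) (by omega) (by omega) (by omega)
                hi hi2 hj hj2, if_neg (by omega)]
            exact ihv i j hi hi2 hj hj2
      · by_cases e3 : j = cx ∧ i+1 = rx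
        · obtain ⟨rfl, rfl⟩ := e3
          rw [specVal_append_c rows l i j hlt]
          show aGet2 (cstep rows C (j, i+1)) i j = _
          unfold cstep
          simp only
          by_cases hA : aCell rows (i+1) j = 'a'
          · rw [if_pos hA, if_neg (fun h => h.1 hA)]
            exact ihv i j hi hi2 hj hj2
          · rw [if_neg hA]
            by_cases hB : blockv rows (i+1) j = 3
            · rw [if_pos hB, if_pos ⟨hA, hB⟩]
              rw [aGet2_aSet2 _ m n _ _ i j _ s3 (by omega) (by omega) (by omega) (by omega)
                  hi hi2 hj hj2, if_neg (by omega),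
                aGet2_aSet2 _ m n _ _ i j _ s2 (by omega) (by omega) (by omega) (by omega)
                  hi hi2 hj hj2, if_pos (by omega)]
            · rw [if_neg hB, if_neg (fun h => hB h.2)]
              rw [aGet2_aSet2 _ m n _ _ i j _ ihs (by omega) (by omega) (by omega) (by omega)
                  hi hi2 hj hj2, if_neg (by omega)]
              exact ihv i j hi hi2 hj hj2
        · by_cases e4 : j = cx ∧ i = rx
          · obtain ⟨rfl, rfl⟩ := e4
            obtain ⟨hd1, hd2⟩ := specVal_append_d rows l i j hlt
            rw [hd1]
            show aGet2 (cstep rows C (j, i)) i j = _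
            unfold cstep
            simp only
            by_cases hA : aCell rows i j = 'a'
            · rw [if_pos hA, if_pos hA]
              rw [ihv i j hi hi2 hj hj2, hd2]
            · rw [if_neg hA, if_neg hA]
              by_cases hB : blockv rows i j = 3
              · rw [if_pos hB]
                rw [aGet2_aSet2 _ m n _ _ i j _ s3 (by omega) (by omega) (by omega) (by omega)
                    hi hi2 hj hj2, if_neg (by omega),
                  aGet2_aSet2 _ m n _ _ i j _ s2 (by omega) (by omega) (by omega) (by omega)
                    hi hi2 hj hj2, if_neg (by omega),
                  aGet2_aSet2 _ m n _ _ i j _ s1 (by omega) (by omega) (by omega) (by omega)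
                    hi hi2 hj hj2, if_neg (by omega),
                  aGet2_aSet2 _ m n _ _ i j _ ihs (by omega) (by omega) (by omega) (by omega)
                    hi hi2 hj hj2, if_pos (by omega)]
              · rw [if_neg hB]
                rw [aGet2_aSet2 _ m n _ _ i j _ ihs (by omega) (by omega) (by omega) (by omega)
                    hi hi2 hj hj2, if_pos (by omega)]
          · have ne1 : ((cx, rx) : Int × Int) ≠ (j+1, i+1) := by
              simp only [ne_eq, Prod.mk.injEq, not_and]; intro ha hb; exact e1 ⟨ha.symm, hb.symm⟩
            have ne2 : ((cx, rx) : Int × Int) ≠ (j+1, i) := by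
              simp only [ne_eq, Prod.mk.injEq, not_and]; intro ha hb; exact e2 ⟨ha.symm, hb.symm⟩
            have ne3 : ((cx, rx) : Int × Int) ≠ (j, i+1) := by
              simp only [ne_eq, Prod.mk.injEq, not_and]; intro ha hb; exact e3 ⟨ha.symm, hb.symm⟩
            have ne4 : ((cx, rx) : Int × Int) ≠ (j, i) := by
              simp only [ne_eq, Prod.mk.injEq, not_and]; intro ha hb; exact e4 ⟨ha.symm, hb.symm⟩
            rw [specVal_append_notrel rows l (cx, rx) i j ne1 ne2 ne3 ne4]
            show aGet2 (cstep rows C (cx, rx)) i j = _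
            unfold cstep
            simp only
            by_cases hA : aCell rows rx cx = 'a'
            · rw [if_pos hA]
              exact ihv i j hi hi2 hj hj2
            · rw [if_neg hA]
              by_cases hB : blockv rows rx cx = 3
              · rw [if_pos hB]
                rw [aGet2_aSet2 _ m n _ _ i j _ s3 (by omega) (by omega) (by omega) (by omega)
                    hi hi2 hj hj2, if_neg (by omega),
                  aGet2_aSet2 _ m n _ _ i j _ s2 (by omega) (by omega) (by omega) (by omega)
                    hi hi2 hj hj2, if_neg (by omega),
                  aGet2_aSet2 _ m n _ _ i j _ s1 (by omega) (by omega) (by omega) (by omega)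
                    hi hi2 hj hj2, if_neg (by omega),
                  aGet2_aSet2 _ m n _ _ i j _ ihs (by omega) (by omega) (by omega) (by omega)
                    hi hi2 hj hj2, if_neg (by omega)]
                exact ihv i j hi hi2 hj hj2
              · rw [if_neg hB]
                rw [aGet2_aSet2 _ m n _ _ i j _ ihs (by omega) (by omega) (by omega) (by omega)
                    hi hi2 hj hj2, if_neg (by omega)]
                exact ihv i j hi hi2 hj hj2

theorem countingSpec (m n : Int) (rows : List (List Char)) (top : List Int)
    (htop : ∀ c : Int, 0 ≤ c → c < n → 0 ≤ PySem.List.pyGetD top c 0)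
    (hpad : ∀ c r : Int, 0 ≤ c → c < n → 0 ≤ r → r < PySem.List.pyGetD top c 0 →
      aCell rows r c = 'a')
    (i j : Int) (hi : 0 ≤ i) (hi2 : i < m) (hj : 0 ≤ j) (hj2 : j < n) :
    (aGet2 (counting m n rows top) i j = 3 ↔ remP m n rows i j) := by
  have hok : ∀ p ∈ citers m n top, 1 ≤ p.1 ∧ p.1 < n ∧ 1 ≤ p.2 ∧ p.2 < m := by
    intro p hp
    rcases (mem_citers m n top p).mp hp with ⟨h1, h2, h3, h4⟩
    have := htop p.1 (by omega) h2
    exact ⟨h1, h2, by omega, h4⟩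
  obtain ⟨-, hval⟩ := foldl_cstep_spec rows m n (citers m n top) hok (pairwise_citers m n top)
  rw [counting_eq_foldl, hval i j hi hi2 hj hj2]
  have hmem : ∀ a b : Int, MW m n rows a b → (b, a) ∈ citers m n top := by
    intro a b hm
    obtain ⟨ha1, ha2, hb1, hb2, hne, hbv⟩ := hm
    rcases (blockv_eq_three_iff rows a b).mp hbv with ⟨q1, q2, q3⟩
    have hnotpad : ¬ (a - 1 < PySem.List.pyGetD top b 0) := by
      intro hlt
      have := hpad b (a-1) (by omega) hb2 (by omega) hlt
      rw [this] at q2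
      exact hne (q2.symm)
    exact (mem_citers m n top (b, a)).mpr ⟨hb1, hb2, by simp; omega, ha2⟩
  unfold specVal
  constructor
  · intro hv
    by_cases c1 : ((j+1, i+1) ∈ citers m n top) ∧ Mb rows (i+1) (j+1)
    · rcases (mem_citers m n top _).mp c1.1 with ⟨b1, b2, b3, b4⟩
      simp only at b1 b2 b3 b4
      exact Or.inr (Or.inr (Or.inr ⟨by omega, b4, by omega, b2, c1.2⟩))
    · rw [if_neg c1] at hv
      by_cases c2 : ((j+1, i) ∈ citers m n top) ∧ Mb rows i (j+1)
      · rcases (mem_citers m n top _).mp c2.1 with ⟨b1, b2, b3, b4⟩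
        simp only at b1 b2 b3 b4
        have ht := htop (j+1) (by omega) b2
        exact Or.inr (Or.inl ⟨by omega, b4, by omega, b2, c2.2⟩)
      · rw [if_neg c2] at hv
        by_cases c3 : ((j, i+1) ∈ citers m n top) ∧ Mb rows (i+1) j
        · rcases (mem_citers m n top _).mp c3.1 with ⟨b1, b2, b3, b4⟩
          simp only at b1 b2 b3 b4
          exact Or.inr (Or.inr (Or.inl ⟨by omega, b4, b1, b2, c3.2⟩))
        · rw [if_neg c3] at hv
          by_cases c4 : ((j, i) ∈ citers m n top)
          · rw [if_pos c4] at hv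
            rcases (mem_citers m n top _).mp c4 with ⟨b1, b2, b3, b4⟩
            simp only at b1 b2 b3 b4
            have ht := htop j (by omega) b2
            split_ifs at hv with hA
            · exact absurd hv (by norm_num)
            · exact Or.inl ⟨by omega, b4, b1, b2, hA, hv⟩
          · rw [if_neg c4] at hv
            exact absurd hv (by norm_num)
  · intro hr
    rcases hr with hm | hm | hm | hm
    · have hmem1 := hmem i j hm
      have hne := hm.2.2.2.2.1
      have hbv := hm.2.2.2.2.2
      split_ifs <;>
        first
          | rfl
          | exact hbv
          | exact absurd ‹aCell rows i j = 'a'› hne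
          | exact absurd hmem1 ‹¬ ((j, i) ∈ citers m n top)›
    · have hmem1 := hmem i (j+1) hm
      split_ifs with c1 c2 c3 c4 c5 <;>
        first
          | rfl
          | exact absurd ⟨hmem1, hm.2.2.2.2⟩ c2
    · have hmem1 := hmem (i+1) j hm
      split_ifs with c1 c2 c3 c4 c5 <;>
        first
          | rfl
          | exact absurd ⟨hmem1, hm.2.2.2.2⟩ c3
    · have hmem1 := hmem (i+1) (j+1) hm
      split_ifs with c1 c2 c3 c4 c5 <;>
        first
          | rfl
          | exact absurd ⟨hmem1, hm.2.2.2.2⟩ c1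

theorem isdone_iff (m n : Int) (count : List (List Int)) :
    isdone m n count = true ↔
      ∀ i j : Int, 0 ≤ i → i < m → 0 ≤ j → j < n → aGet2 count i j ≠ 3 := by
  unfold isdone
  simp only [List.all_eq_true, PySem.List.mem_pyRange_one, Bool.not_eq_eq_eq_not,
    Bool.not_true, beq_eq_false_iff_ne, ne_eq]
  constructor
  · intro h i j hi hi2 hj hj2
    exact h i ⟨hi, hi2⟩ j ⟨hj, hj2⟩
  · intro h r hr c hc
    exact h r c hr.1 hr.2 hc.1 hc.2

theorem remP_bounds (m n : Int) (rows : List (List Char)) (i j : Int)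
    (h : remP m n rows i j) : 0 ≤ i ∧ i < m ∧ 0 ≤ j ∧ j < n := by
  rcases h with ⟨h1, h2, h3, h4, -⟩ | ⟨h1, h2, h3, h4, -⟩ | ⟨h1, h2, h3, h4, -⟩ | ⟨h1, h2, h3, h4, -⟩ <;>
    omega

-- membership in B's marked set, purely structurally
theorem mem_bMarked (n : Int) (stks : List (List Char)) (p : Int × Int) :
    p ∈ bMarked n stks ↔
      ∃ c h : Int, 0 ≤ c ∧ c < n-1 ∧ 0 ≤ h ∧ h < min (sLen stks c) (sLen stks (c+1)) - 1 ∧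
        (sGet stks c h ≠ 'a' ∧ sGet stks c (h+1) = sGet stks c h
          ∧ sGet stks (c+1) h = sGet stks c h ∧ sGet stks (c+1) (h+1) = sGet stks c h) ∧
        (p = (c, h) ∨ p = (c, h+1) ∨ p = (c+1, h) ∨ p = (c+1, h+1)) := by
  unfold bMarked
  have inner : ∀ (c : Int) (lh : List Int) (s : PySem.Set (Int × Int)),
      p ∈ lh.foldl (fun s h =>
        if sGet stks c h ≠ 'a' ∧ sGet stks c (h+1) = sGet stks c h
            ∧ sGet stks (c+1) h = sGet stks c h ∧ sGet stks (c+1) (h+1) = sGet stks c h then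
          PySem.Set.add (PySem.Set.add (PySem.Set.add (PySem.Set.add s (c, h)) (c, h+1)) (c+1, h)) (c+1, h+1)
        else s) s ↔
      p ∈ s ∨ ∃ h ∈ lh, (sGet stks c h ≠ 'a' ∧ sGet stks c (h+1) = sGet stks c h
            ∧ sGet stks (c+1) h = sGet stks c h ∧ sGet stks (c+1) (h+1) = sGet stks c h) ∧
          (p = (c, h) ∨ p = (c, h+1) ∨ p = (c+1, h) ∨ p = (c+1, h+1)) := by
    intro c lh
    induction lh with
    | nil => simp
    | cons x xs ih =>
      intro s
      rw [List.foldl_cons]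
      by_cases hcnd : sGet stks c x ≠ 'a' ∧ sGet stks c (x+1) = sGet stks c x
          ∧ sGet stks (c+1) x = sGet stks c x ∧ sGet stks (c+1) (x+1) = sGet stks c x
      · rw [if_pos hcnd, ih]
        simp only [PySem.Set.mem_add, List.mem_cons]
        constructor
        · rintro (((((hs | hx) | hx) | hx) | hx) | ⟨h, hh, hcond, hcs⟩)
          · exact Or.inl hs
          · exact Or.inr ⟨x, Or.inl rfl, hcnd, Or.inl hx⟩
          · exact Or.inr ⟨x, Or.inl rfl, hcnd, Or.inr (Or.inl hx)⟩
          · exact Or.inr ⟨x, Or.inl rfl, hcnd, Or.inr (Or.inr (Or.inl hx))⟩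
          · exact Or.inr ⟨x, Or.inl rfl, hcnd, Or.inr (Or.inr (Or.inr hx))⟩
          · exact Or.inr ⟨h, Or.inr hh, hcond, hcs⟩
        · rintro (hs | ⟨h, hh | hh, hcond, hcs⟩)
          · exact Or.inl (Or.inl (Or.inl (Or.inl (Or.inl hs))))
          · subst hh
            rcases hcs with h1 | h1 | h1 | h1
            · exact Or.inl (Or.inl (Or.inl (Or.inl (Or.inr h1))))
            · exact Or.inl (Or.inl (Or.inl (Or.inr h1)))
            · exact Or.inl (Or.inl (Or.inr h1))
            · exact Or.inl (Or.inr h1)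
          · exact Or.inr ⟨h, hh, hcond, hcs⟩
      · rw [if_neg hcnd, ih]
        simp only [List.mem_cons]
        constructor
        · rintro (hs | ⟨h, hh, hcond, hcs⟩)
          · exact Or.inl hs
          · exact Or.inr ⟨h, Or.inr hh, hcond, hcs⟩
        · rintro (hs | ⟨h, hh | hh, hcond, hcs⟩)
          · exact Or.inl hs
          · subst hh; exact absurd hcond hcnd
          · exact Or.inr ⟨h, hh, hcond, hcs⟩
  have outer : ∀ (lc : List Int) (s : PySem.Set (Int × Int)),
      p ∈ lc.foldl (fun s c =>
        (PySem.List.pyRange 0 (min (sLen stks c) (sLen stks (c+1)) - 1) 1).foldl (fun s h =>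
          if sGet stks c h ≠ 'a' ∧ sGet stks c (h+1) = sGet stks c h
              ∧ sGet stks (c+1) h = sGet stks c h ∧ sGet stks (c+1) (h+1) = sGet stks c h then
            PySem.Set.add (PySem.Set.add (PySem.Set.add (PySem.Set.add s (c, h)) (c, h+1)) (c+1, h)) (c+1, h+1)
          else s) s) s ↔
      p ∈ s ∨ ∃ c ∈ lc, ∃ h ∈ PySem.List.pyRange 0 (min (sLen stks c) (sLen stks (c+1)) - 1) 1,
        (sGet stks c h ≠ 'a' ∧ sGet stks c (h+1) = sGet stks c h
            ∧ sGet stks (c+1) h = sGet stks c h ∧ sGet stks (c+1) (h+1) = sGet stks c h) ∧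
        (p = (c, h) ∨ p = (c, h+1) ∨ p = (c+1, h) ∨ p = (c+1, h+1)) := by
    intro lc
    induction lc with
    | nil => simp
    | cons x xs ih =>
      intro s
      rw [List.foldl_cons, ih, inner x]
      simp only [List.mem_cons]
      constructor
      · rintro ((hs | ⟨h, hh, hcond, hcs⟩) | ⟨c, hc, hrest⟩)
        · exact Or.inl hs
        · exact Or.inr ⟨x, Or.inl rfl, h, hh, hcond, hcs⟩
        · exact Or.inr ⟨c, Or.inr hc, hrest⟩
      · rintro (hs | ⟨c, hc | hc, hrest⟩)
        · exact Or.inl (Or.inl hs)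
        · subst hc; exact Or.inl (Or.inr hrest)
        · exact Or.inr ⟨c, hc, hrest⟩
  rw [outer]
  simp only [PySem.List.mem_pyRange_one]
  constructor
  · rintro (hs | ⟨c, hc, h, hh, hcond, hcs⟩)
    · simp [PySem.Set.empty] at hs
    · exact ⟨c, h, hc.1, hc.2, hh.1, hh.2, hcond, hcs⟩
  · rintro ⟨c, h, h1, h2, h3, h4, hcond, hcs⟩
    exact Or.inr ⟨c, ⟨h1, h2⟩, h, ⟨h3, h4⟩, hcond, hcs⟩

-- B's marked (column, height) pairs are exactly A's removed cells, under the coordinate map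
-- row = m - 1 - height
theorem mem_bMarked_iff_remP (m n : Int) (rows : List (List Char)) (top : List Int)
    (stks : List (List Char))
    (htopb' : ∀ c : Int, 0 ≤ c → c < n →
      0 ≤ PySem.List.pyGetD top c 0 ∧ PySem.List.pyGetD top c 0 ≤ max m 0)
    (hpad : ∀ c r : Int, 0 ≤ c → c < n → 0 ≤ r → r < PySem.List.pyGetD top c 0 →
      aCell rows r c = 'a')
    (hsc : ∀ c : Int, 0 ≤ c → c < n →
      (PySem.List.pyGetD stks c []).length = (m - PySem.List.pyGetD top c 0).toNat)
    (hval : ∀ c h : Int, 0 ≤ c → c < n → 0 ≤ h → h < m - PySem.List.pyGetD top c 0 →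
      sGet stks c h = aCell rows (m-1-h) c)
    (p : Int × Int) :
    p ∈ bMarked n stks ↔ remP m n rows (m - 1 - p.2) p.1 := by
  have hslen : ∀ c : Int, 0 ≤ c → c < n → sLen stks c = ((m - PySem.List.pyGetD top c 0).toNat : Int) := by
    intro c hc hc2
    unfold sLen
    rw [hsc c hc hc2]
  obtain ⟨pc, ph⟩ := p
  rw [mem_bMarked]
  simp only
  constructor
  · rintro ⟨c, h, h1, h2, h3, h4, ⟨hv, e1, e2, e3⟩, hcs⟩
    have lc := hslen c (by omega) (by omega)
    have lc1 := hslen (c+1) (by omega) (by omega)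
    have tc := htopb' c (by omega) (by omega)
    have tc1 := htopb' (c+1) (by omega) (by omega)
    -- h+1 < both stack lengths, as integers
    have hl : h + 1 < m - PySem.List.pyGetD top c 0 ∧ h + 1 < m - PySem.List.pyGetD top (c+1) 0 := by
      rw [lc, lc1] at h4
      constructor <;> omega
    have hm2 : 1 ≤ m - 1 - h ∧ m - 1 - h < m := by omega
    have v00 := hval c h (by omega) (by omega) h3 (by omega)
    have v01 := hval c (h+1) (by omega) (by omega) (by omega) hl.1
    have v10 := hval (c+1) h (by omega) (by omega) h3 (by omega)
    have v11 := hval (c+1) (h+1) (by omega) (by omega) (by omega) hl.2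
    rw [v00] at hv e1 e2 e3
    rw [v01] at e1
    rw [v10] at e2
    rw [v11] at e3
    -- matched window with bottom-right (m-1-h, c+1)
    have hMW : MW m n rows (m-1-h) (c+1) := by
      refine ⟨by omega, by omega, by omega, by omega, ?_, ?_⟩
      · rw [e2]; exact hv
      · rw [blockv_eq_three_iff]
        have er : m - 1 - h - 1 = m - 1 - (h+1) := by ring
        have ec : c + 1 - 1 = c := by ring
        rw [er, ec, e2]
        exact ⟨e1, by rw [e3], rfl⟩
    rcases hcs with hq | hq | hq | hq <;>
      (rw [Prod.mk.injEq] at hq; obtain ⟨rfl, rfl⟩ := hq)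
    · exact Or.inr (Or.inl hMW)
    · have er : m - 1 - (h+1) + 1 = m - 1 - h := by ring
      exact Or.inr (Or.inr (Or.inr (by rw [er]; exact hMW)))
    · exact Or.inl (by
        have ec : c + 1 = c + 1 := rfl
        exact hMW)
    · have er : m - 1 - (h+1) + 1 = m - 1 - h := by ring
      exact Or.inr (Or.inr (Or.inl (by rw [er]; exact hMW)))
  · intro hr
    -- from a matched A-window with bottom-right (a, b), produce B's window (b-1, m-1-a)
    have key : ∀ a b : Int, 1 ≤ a → a < m → 1 ≤ b → b < n → Mb rows a b →
        0 ≤ b-1 ∧ b-1 < n-1 ∧ 0 ≤ m-1-a ∧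
        m-1-a < min (sLen stks (b-1)) (sLen stks (b-1+1)) - 1 ∧
        (sGet stks (b-1) (m-1-a) ≠ 'a'
          ∧ sGet stks (b-1) (m-1-a+1) = sGet stks (b-1) (m-1-a)
          ∧ sGet stks (b-1+1) (m-1-a) = sGet stks (b-1) (m-1-a)
          ∧ sGet stks (b-1+1) (m-1-a+1) = sGet stks (b-1) (m-1-a)) := by
      rintro a b ha1 ha2 hb1 hb2 ⟨hne, hbv⟩
      rcases (blockv_eq_three_iff rows a b).mp hbv with ⟨q1, q2, q3⟩
      have eb : b - 1 + 1 = b := by ring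
      have tcL := htopb' (b-1) (by omega) (by omega)
      have tcR := htopb' b (by omega) (by omega)
      -- the window's upper cells are not padding
      have hnpL : PySem.List.pyGetD top (b-1) 0 ≤ a - 1 := by
        by_contra hlt
        have := hpad (b-1) (a-1) (by omega) (by omega) (by omega) (by omega)
        rw [this] at q1
        rw [← q1] at hne
        exact hne rfl
      have hnpR : PySem.List.pyGetD top b 0 ≤ a - 1 := by
        by_contra hlt
        have := hpad b (a-1) (by omega) hb2 (by omega) (by omega)
        rw [this] at q2
        rw [← q2] at hne
        exact hne rfl
      have lcL := hslen (b-1) (by omega) (by omega)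
      have lcR := hslen b (by omega) (by omega)
      have hhb : m - 1 - a < min (sLen stks (b-1)) (sLen stks (b-1+1)) - 1 := by
        rw [eb, lcL, lcR]
        omega
      have ea : m - 1 - (m-1-a) = a := by ring
      have ea1 : m - 1 - (m-1-a+1) = a - 1 := by ring
      have v00 := hval (b-1) (m-1-a) (by omega) (by omega) (by omega) (by omega)
      have v01 := hval (b-1) (m-1-a+1) (by omega) (by omega) (by omega) (by omega)
      have v10 := hval b (m-1-a) (by omega) hb2 (by omega) (by omega)
      have v11 := hval b (m-1-a+1) (by omega) hb2 (by omega) (by omega)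
      rw [ea] at v00 v10
      rw [ea1] at v01 v11
      refine ⟨by omega, by omega, by omega, hhb, ?_, ?_, ?_, ?_⟩
      · rw [v00, q3]
        exact hne
      · rw [v01, v00, q1, q3]
      · rw [eb, v10, v00, ← q3]
      · rw [eb, v11, v00, q2, ← q3]
    rcases hr with hm4 | hm4 | hm4 | hm4
    · -- MW (m-1-ph) pc : window (pc-1, ph); cell = (c+1, h)
      obtain ⟨h1, h2, h3, h4, hMb⟩ := hm4
      obtain ⟨k1, k2, k3, k4, kc⟩ := key (m-1-ph) pc h1 h2 h3 h4 hMb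
      have e : m - 1 - (m-1-ph) = ph := by ring
      rw [e] at k3 k4 kc
      exact ⟨pc-1, ph, k1, k2, k3, k4, kc, Or.inr (Or.inr (Or.inl (by rw [Prod.mk.injEq]; omega)))⟩
    · obtain ⟨h1, h2, h3, h4, hMb⟩ := hm4
      obtain ⟨k1, k2, k3, k4, kc⟩ := key (m-1-ph) (pc+1) h1 h2 h3 h4 hMb
      have e : m - 1 - (m-1-ph) = ph := by ring
      rw [e] at k3 k4 kc
      exact ⟨pc+1-1, ph, k1, k2, k3, k4, kc, Or.inl (by rw [Prod.mk.injEq]; omega)⟩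
    · obtain ⟨h1, h2, h3, h4, hMb⟩ := hm4
      obtain ⟨k1, k2, k3, k4, kc⟩ := key (m-1-ph+1) pc h1 h2 h3 h4 hMb
      have e : m - 1 - (m-1-ph+1) = ph - 1 := by ring
      rw [e] at k3 k4 kc
      exact ⟨pc-1, ph-1, k1, k2, k3, k4, kc, Or.inr (Or.inr (Or.inr (by rw [Prod.mk.injEq]; omega)))⟩
    · obtain ⟨h1, h2, h3, h4, hMb⟩ := hm4
      obtain ⟨k1, k2, k3, k4, kc⟩ := key (m-1-ph+1) (pc+1) h1 h2 h3 h4 hMb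
      have e : m - 1 - (m-1-ph+1) = ph - 1 := by ring
      rw [e] at k3 k4 kc
      exact ⟨pc+1-1, ph-1, k1, k2, k3, k4, kc, Or.inr (Or.inl (by rw [Prod.mk.injEq]; omega))⟩

theorem bMarked_empty_iff (m n : Int) (rows stks : List (List Char)) (top : List Int)
    (htopb' : ∀ c : Int, 0 ≤ c → c < n →
      0 ≤ PySem.List.pyGetD top c 0 ∧ PySem.List.pyGetD top c 0 ≤ max m 0)
    (hpad : ∀ c r : Int, 0 ≤ c → c < n → 0 ≤ r → r < PySem.List.pyGetD top c 0 →
      aCell rows r c = 'a')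
    (hsc : ∀ c : Int, 0 ≤ c → c < n →
      (PySem.List.pyGetD stks c []).length = (m - PySem.List.pyGetD top c 0).toNat)
    (hval : ∀ c h : Int, 0 ≤ c → c < n → 0 ≤ h → h < m - PySem.List.pyGetD top c 0 →
      sGet stks c h = aCell rows (m-1-h) c) :
    (bMarked n stks = [] ↔ ∀ i j : Int, ¬ remP m n rows i j) := by
  rw [List.eq_nil_iff_forall_not_mem]
  constructor
  · intro hnone i j hr
    obtain ⟨b1, b2, b3, b4⟩ := remP_bounds m n rows i j hr
    apply hnone (j, m-1-i)
    rw [mem_bMarked_iff_remP m n rows top stks htopb' hpad hsc hval (j, m-1-i)]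
    have e : m - 1 - (m-1-i) = i := by ring
    rw [e]
    exact hr
  · intro hno p hp
    exact hno _ _ ((mem_bMarked_iff_remP m n rows top stks htopb' hpad hsc hval p).mp hp)

-- the inner loop of poping
theorem foldl_popcol (P : Int → Prop) [DecidablePred P] (f : Int → Char) (l : List Int)
    (t : Int) (acc : List Char) :
    l.foldl (fun (p : Int × List Char) r =>
        if P r then (p.1 + 1, p.2) else (p.1, p.2 ++ [f r])) (t, acc)
      = (t + (l.countP (fun r => decide (P r)) : Int),
         acc ++ (l.filter (fun r => !(decide (P r)))).map f) := by
  induction l generalizing t acc with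
  | nil => simp
  | cons x xs ih =>
    by_cases h : P x <;> simp [h, ih] <;> ring

-- ===== end of generic lemmas; step-level abbreviations =====

-- old top of column c; removed cells in column c; surviving chars of column c; new column
def kA (m : Int) (count : List (List Int)) (top : List Int) (c : Int) : Int :=
  ((PySem.List.pyRange (PySem.List.pyGetD top c 0) m 1).countP (fun r => decide (aGet2 count r c = 3)) : Int)

def tmpA (m : Int) (count : List (List Int)) (rows : List (List Char)) (top : List Int)
    (c : Int) : List Char :=
  ((PySem.List.pyRange (PySem.List.pyGetD top c 0) m 1).filter (fun r => !(decide (aGet2 count r c = 3)))).map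
    (fun r => aCell rows r c)

def newcolA (m : Int) (count : List (List Int)) (rows : List (List Char)) (top : List Int)
    (c : Int) : List Char :=
  PySem.List.pyRepeat ['a'] (PySem.List.pyGetD top c 0 + kA m count top c) ++ tmpA m count rows top c

-- B's surviving stack of column c, read off the pre-round stks
def keptB (mk : List (Int × Int)) (stks : List (List Char)) (c : Int) : List Char :=
  ((PySem.List.pyRange 0 (sLen stks c) 1).filter (fun h => !(decide ((c, h) ∈ mk)))).map
    (fun h => sGet stks c h)

theorem pyGetD_pySetD_self {α : Type} (xs : List α) (a : Int) (v d : α)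
    (ha : 0 ≤ a) (hlt : a < (xs.length : Int)) :
    PySem.List.pyGetD (PySem.List.pySetD xs a v) a d = v := by
  rw [PySem.List.pySetD_of_nonneg _ _ ha,
    PySem.List.pyGetD_eq_getElem _ _ ha (by simpa using hlt),
    List.getElem_set, if_pos rfl]

theorem pyGetD_pySetD_ne {α : Type} (xs : List α) (a b : Int) (v d : α)
    (ha : 0 ≤ a) (hb : 0 ≤ b) (hne : b ≠ a) :
    PySem.List.pyGetD (PySem.List.pySetD xs a v) b d = PySem.List.pyGetD xs b d := by
  rw [PySem.List.pySetD_of_nonneg _ _ ha]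
  by_cases hbl : b < (xs.length : Int)
  · rw [PySem.List.pyGetD_eq_getElem _ _ hb (by simpa using hbl),
      PySem.List.pyGetD_eq_getElem _ _ hb hbl, List.getElem_set, if_neg (by omega)]
  · have hbeq : b = ((b.toNat : Nat) : Int) := by omega
    rw [hbeq, PySem.List.pyGetD_natCast, PySem.List.pyGetD_natCast,
      List.getD_eq_default _ _ (by simp only [List.length_set]; omega),
      List.getD_eq_default _ _ (by omega)]

def popStep (m : Int) (count : List (List Int)) (rows : List (List Char))
    (st : List Int × List (List Char)) (c : Int) : List Int × List (List Char) :=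
  let p := (PySem.List.pyRange (PySem.List.pyGetD st.1 c 0) m 1).foldl
    (fun (p : Int × List Char) r =>
      if aGet2 count r c = 3 then (p.1 + 1, p.2)
      else (p.1, p.2 ++ [aCell rows r c])) (PySem.List.pyGetD st.1 c 0, ([] : List Char))
  (PySem.List.pySetD st.1 c p.1,
   PySem.List.pySetD st.2 c (PySem.List.pyRepeat ['a'] p.1 ++ p.2))

theorem popfold_aux (m n : Int) (count : List (List Int)) (rows : List (List Char))
    (top : List Int) :
    ∀ (L : List Int) (st : List Int × List (List Char)),
      L.Nodup → (∀ c ∈ L, 0 ≤ c ∧ c < n) →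
      (∀ c ∈ L, PySem.List.pyGetD st.1 c 0 = PySem.List.pyGetD top c 0) →
      n ≤ (st.1.length : Int) → n ≤ (st.2.length : Int) →
      (L.foldl (popStep m count rows) st).1.length = st.1.length ∧
      (L.foldl (popStep m count rows) st).2.length = st.2.length ∧
      (∀ c : Int, c ∈ L →
        PySem.List.pyGetD (L.foldl (popStep m count rows) st).1 c 0
            = PySem.List.pyGetD top c 0 + kA m count top c
          ∧ PySem.List.pyGetD (L.foldl (popStep m count rows) st).2 c []
            = newcolA m count rows top c) ∧
      (∀ c : Int, 0 ≤ c → c ∉ L →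
        PySem.List.pyGetD (L.foldl (popStep m count rows) st).1 c 0
            = PySem.List.pyGetD st.1 c 0
          ∧ PySem.List.pyGetD (L.foldl (popStep m count rows) st).2 c []
            = PySem.List.pyGetD st.2 c []) := by
  intro L
  induction L with
  | nil =>
    intro st _ _ _ _ _
    exact ⟨rfl, rfl, by simp, fun c _ _ => ⟨rfl, rfl⟩⟩
  | cons c0 L ih =>
    intro st hnd hbd hrd hl1 hl2
    obtain ⟨hc0a, hc0b⟩ := hbd c0 (List.mem_cons_self ..)
    have hrd0 := hrd c0 (List.mem_cons_self ..)
    have hstep : popStep m count rows st c0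
        = (PySem.List.pySetD st.1 c0 (PySem.List.pyGetD top c0 0 + kA m count top c0),
           PySem.List.pySetD st.2 c0 (newcolA m count rows top c0)) := by
      unfold popStep
      rw [hrd0, foldl_popcol (fun r => aGet2 count r c0 = 3) (fun r => aCell rows r c0) _
        (PySem.List.pyGetD top c0 0) []]
      simp [kA, tmpA, newcolA]
    rw [List.foldl_cons, hstep]
    have hnotmem : c0 ∉ L := (List.nodup_cons.mp hnd).1
    have hURD : ∀ c ∈ L, PySem.List.pyGetD
        (PySem.List.pySetD st.1 c0 (PySem.List.pyGetD top c0 0 + kA m count top c0)) c 0 = PySem.List.pyGetD top c 0 := by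
      intro c hc
      rw [pyGetD_pySetD_ne _ c0 c _ _ hc0a (hbd c (List.mem_cons_of_mem _ hc)).1
        (fun h => hnotmem (h ▸ hc))]
      exact hrd c (List.mem_cons_of_mem _ hc)
    obtain ⟨ihl1, ihl2, ihmem, ihnot⟩ := ih
      (PySem.List.pySetD st.1 c0 (PySem.List.pyGetD top c0 0 + kA m count top c0),
       PySem.List.pySetD st.2 c0 (newcolA m count rows top c0))
      (List.nodup_cons.mp hnd).2
      (fun c hc => hbd c (List.mem_cons_of_mem _ hc)) hURD
      (by rw [PySem.List.length_pySetD]; exact hl1)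
      (by rw [PySem.List.length_pySetD]; exact hl2)
    refine ⟨by rw [ihl1, PySem.List.length_pySetD], by rw [ihl2, PySem.List.length_pySetD], ?_, ?_⟩
    · intro c hc
      rcases List.mem_cons.mp hc with rfl | hc'
      · have h1 := (ihnot c hc0a hnotmem).1
        have h2 := (ihnot c hc0a hnotmem).2
        rw [h1, h2, pyGetD_pySetD_self _ _ _ _ hc0a (by omega),
          pyGetD_pySetD_self _ _ _ _ hc0a (by omega)]
        exact ⟨rfl, rfl⟩
      · exact ihmem c hc'
    · intro c hc hcn
      have hcn0 : c ∉ L := fun h => hcn (List.mem_cons_of_mem _ h)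
      have hne : c ≠ c0 := fun h => hcn (h ▸ List.mem_cons_self ..)
      obtain ⟨h1, h2⟩ := ihnot c hc hcn0
      rw [h1, h2, pyGetD_pySetD_ne _ c0 c _ _ hc0a hc hne,
        pyGetD_pySetD_ne _ c0 c _ _ hc0a hc hne]
      exact ⟨rfl, rfl⟩

def tStep (ncols : List (List Char)) (m : Int) (nb : List (List Char)) (c : Int) :
    List (List Char) :=
  (PySem.List.pyRange 0 m 1).foldl (fun nb r =>
    PySem.List.pySetD nb r
      (PySem.List.pyGetD nb r [] ++ [PySem.List.pyGetD (PySem.List.pyGetD ncols c []) r ' '])) nb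

theorem trow_aux (col : List Char) :
    ∀ (LR : List Int) (nb : List (List Char)),
      LR.Nodup → (∀ r ∈ LR, 0 ≤ r ∧ r < (nb.length : Int)) →
      (LR.foldl (fun nb r => PySem.List.pySetD nb r
          (PySem.List.pyGetD nb r [] ++ [PySem.List.pyGetD col r ' '])) nb).length = nb.length ∧
      (∀ r : Int, r ∈ LR →
        PySem.List.pyGetD (LR.foldl (fun nb r => PySem.List.pySetD nb r
          (PySem.List.pyGetD nb r [] ++ [PySem.List.pyGetD col r ' '])) nb) r []
        = PySem.List.pyGetD nb r [] ++ [PySem.List.pyGetD col r ' ']) ∧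
      (∀ r : Int, 0 ≤ r → r ∉ LR →
        PySem.List.pyGetD (LR.foldl (fun nb r => PySem.List.pySetD nb r
          (PySem.List.pyGetD nb r [] ++ [PySem.List.pyGetD col r ' '])) nb) r []
        = PySem.List.pyGetD nb r []) := by
  intro LR
  induction LR with
  | nil => intro nb _ _; exact ⟨rfl, by simp, fun r _ _ => rfl⟩
  | cons r0 LR ih =>
    intro nb hnd hbd
    obtain ⟨hr0a, hr0b⟩ := hbd r0 (List.mem_cons_self ..)
    have hnotmem : r0 ∉ LR := (List.nodup_cons.mp hnd).1
    rw [List.foldl_cons]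
    obtain ⟨ihl, ihmem, ihnot⟩ := ih _ (List.nodup_cons.mp hnd).2
      (fun r hr => ⟨(hbd r (List.mem_cons_of_mem _ hr)).1,
        by rw [PySem.List.length_pySetD]; exact (hbd r (List.mem_cons_of_mem _ hr)).2⟩)
    refine ⟨by rw [ihl, PySem.List.length_pySetD], ?_, ?_⟩
    · intro r hr
      rcases List.mem_cons.mp hr with rfl | hr'
      · rw [ihnot r hr0a hnotmem, pyGetD_pySetD_self _ _ _ _ hr0a hr0b]
      · rw [ihmem r hr', pyGetD_pySetD_ne _ r0 r _ _ hr0a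
          (hbd r (List.mem_cons_of_mem _ hr')).1 (fun h => hnotmem (h ▸ hr'))]
    · intro r hr hrn
      rw [ihnot r hr (fun h => hrn (List.mem_cons_of_mem _ h)),
        pyGetD_pySetD_ne _ r0 r _ _ hr0a hr (fun h => hrn (h ▸ List.mem_cons_self ..))]

theorem touter_aux (ncols : List (List Char)) (m : Int) :
    ∀ (LC : List Int) (nb : List (List Char)), m ≤ (nb.length : Int) →
      (LC.foldl (tStep ncols m) nb).length = nb.length ∧
      (∀ r : Int, 0 ≤ r → r < m →
        PySem.List.pyGetD (LC.foldl (tStep ncols m) nb) r []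
          = PySem.List.pyGetD nb r []
            ++ LC.map (fun c => PySem.List.pyGetD (PySem.List.pyGetD ncols c []) r ' ')) := by
  intro LC
  induction LC with
  | nil => intro nb _; exact ⟨rfl, by simp⟩
  | cons c0 LC ih =>
    intro nb hm
    rw [List.foldl_cons]
    obtain ⟨hil, himem, hinot⟩ := trow_aux (PySem.List.pyGetD ncols c0 [])
      (PySem.List.pyRange 0 m 1) nb (PySem.List.nodup_pyRange_one 0 m)
      (fun r hr => by
        rcases PySem.List.mem_pyRange_one.mp hr with ⟨h1, h2⟩
        exact ⟨h1, by omega⟩)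
    obtain ⟨ihl, ihv⟩ := ih (tStep ncols m nb c0) (by rw [show (tStep ncols m nb c0).length = nb.length from hil]; exact hm)
    refine ⟨by rw [ihl]; exact hil, ?_⟩
    · intro r hr hr2
      rw [ihv r hr hr2]
      rw [show PySem.List.pyGetD (tStep ncols m nb c0) r []
          = PySem.List.pyGetD nb r []
            ++ [PySem.List.pyGetD (PySem.List.pyGetD ncols c0 []) r ' ']
        from himem r (PySem.List.mem_pyRange_one.mpr ⟨hr, hr2⟩)]
      simp

theorem bfold_aux (n : Int) (mk : List (Int × Int)) (stks : List (List Char)) :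
    ∀ (L : List Int) (st : List (List Char) × Int),
      L.Nodup → (∀ c ∈ L, 0 ≤ c ∧ c < n) →
      (∀ c ∈ L, PySem.List.pyGetD st.1 c [] = PySem.List.pyGetD stks c []) →
      n ≤ (st.1.length : Int) →
      (L.foldl (bStep mk) st).1.length = st.1.length ∧
      (∀ c : Int, c ∈ L →
        PySem.List.pyGetD (L.foldl (bStep mk) st).1 c [] = keptB mk stks c) ∧
      (∀ c : Int, 0 ≤ c → c ∉ L →
        PySem.List.pyGetD (L.foldl (bStep mk) st).1 c [] = PySem.List.pyGetD st.1 c []) ∧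
      (L.foldl (bStep mk) st).2
        = st.2 + (L.map (fun c => sLen stks c - ((keptB mk stks c).length : Int))).sum := by
  intro L
  induction L with
  | nil =>
    intro st _ _ _ _
    exact ⟨rfl, by simp, fun c _ _ => rfl, by simp⟩
  | cons c0 L ih =>
    intro st hnd hbd hrd hl1
    obtain ⟨hc0a, hc0b⟩ := hbd c0 (List.mem_cons_self ..)
    have hrd0 := hrd c0 (List.mem_cons_self ..)
    have hnotmem : c0 ∉ L := (List.nodup_cons.mp hnd).1
    have hsl : sLen st.1 c0 = sLen stks c0 := by unfold sLen; rw [hrd0]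
    have hnw : ((PySem.List.pyRange 0 (sLen st.1 c0) 1).filter
        (fun h => !(decide ((c0, h) ∈ mk)))).map (fun h => sGet st.1 c0 h)
        = keptB mk stks c0 := by
      rw [hsl]
      unfold keptB
      apply List.map_congr_left
      intro h _
      unfold sGet
      rw [hrd0]
    have hstep : bStep mk st c0
        = (PySem.List.pySetD st.1 c0 (keptB mk stks c0),
           st.2 + (sLen stks c0 - ((keptB mk stks c0).length : Int))) := by
      unfold bStep
      rw [hnw, hsl]
    rw [List.foldl_cons, hstep]
    obtain ⟨ihl, ihmem, ihnot, ihsum⟩ := ih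
      (PySem.List.pySetD st.1 c0 (keptB mk stks c0),
       st.2 + (sLen stks c0 - ((keptB mk stks c0).length : Int)))
      (List.nodup_cons.mp hnd).2
      (fun c hc => hbd c (List.mem_cons_of_mem _ hc))
      (fun c hc => by
        rw [pyGetD_pySetD_ne _ c0 c _ _ hc0a (hbd c (List.mem_cons_of_mem _ hc)).1
          (fun h => hnotmem (h ▸ hc))]
        exact hrd c (List.mem_cons_of_mem _ hc))
      (by rw [PySem.List.length_pySetD]; exact hl1)
    refine ⟨by rw [ihl, PySem.List.length_pySetD], ?_, ?_, ?_⟩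
    · intro c hc
      rcases List.mem_cons.mp hc with rfl | hc'
      · rw [ihnot c hc0a hnotmem, pyGetD_pySetD_self _ _ _ _ hc0a (by omega)]
      · exact ihmem c hc'
    · intro c hc hcn
      rw [ihnot c hc (fun h => hcn (List.mem_cons_of_mem _ h)),
        pyGetD_pySetD_ne _ c0 c _ _ hc0a hc (fun h => hcn (h ▸ List.mem_cons_self ..))]
    · rw [ihsum]
      simp
      ring

-- reversing an increasing range is a decreasing reindexing
theorem rev_range (a b : Int) :
    (PySem.List.pyRange a b 1).reverse
      = (PySem.List.pyRange 0 (b - a) 1).map (fun h => b - 1 - h) := by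
  have h1 : PySem.List.pyRange (b-1) (a-1) (-1) = (PySem.List.pyRange a b 1).reverse := by
    have := PySem.List.pyRange_neg_one_eq_reverse (b-1) (a-1)
    simpa using this
  rw [← h1, PySem.List.pyRange_neg_one, PySem.List.pyRange_one]
  rw [List.map_map]
  have e : (b - 1 - (a-1)) = b - a := by ring
  rw [e]
  have e2 : (b - a - 0) = b - a := by ring
  rw [e2]
  apply List.map_congr_left
  intro k _
  simp only [Function.comp]
  ring

-- B's surviving stack is exactly the reverse of A's surviving column segment
theorem keptB_eq_tmpA (m n : Int) (rows : List (List Char)) (top : List Int)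
    (stks : List (List Char)) (c : Int) (hm : 0 ≤ m) (hc : 0 ≤ c) (hc2 : c < n)
    (htopb' : ∀ c : Int, 0 ≤ c → c < n →
      0 ≤ PySem.List.pyGetD top c 0 ∧ PySem.List.pyGetD top c 0 ≤ max m 0)
    (hpad : ∀ c r : Int, 0 ≤ c → c < n → 0 ≤ r → r < PySem.List.pyGetD top c 0 →
      aCell rows r c = 'a')
    (hsc : ∀ c : Int, 0 ≤ c → c < n →
      (PySem.List.pyGetD stks c []).length = (m - PySem.List.pyGetD top c 0).toNat)
    (hval : ∀ c h : Int, 0 ≤ c → c < n → 0 ≤ h → h < m - PySem.List.pyGetD top c 0 →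
      sGet stks c h = aCell rows (m-1-h) c) :
    keptB (bMarked n stks) stks c = (tmpA m (counting m n rows top) rows top c).reverse := by
  have htop0 : ∀ c : Int, 0 ≤ c → c < n → 0 ≤ PySem.List.pyGetD top c 0 :=
    fun c a b => (htopb' c a b).1
  have hta := htopb' c hc hc2
  set tc := PySem.List.pyGetD top c 0 with htc
  have hL : sLen stks c = ((m - tc).toNat : Int) := by
    unfold sLen; rw [hsc c hc hc2]
  -- step 1: rewrite keptB's predicate and values through the coordinate map
  have step1 : keptB (bMarked n stks) stks c
      = ((PySem.List.pyRange 0 (sLen stks c) 1).filter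
          (fun h => !(decide (aGet2 (counting m n rows top) (m-1-h) c = 3)))).map
        (fun h => aCell rows (m-1-h) c) := by
    unfold keptB
    have hpred : ∀ h ∈ PySem.List.pyRange 0 (sLen stks c) 1,
        (!(decide ((c, h) ∈ bMarked n stks)))
          = (!(decide (aGet2 (counting m n rows top) (m-1-h) c = 3))) := by
      intro h hh
      rcases PySem.List.mem_pyRange_one.mp hh with ⟨hh1, hh2⟩
      rw [hL] at hh2
      have hhm : h < m - tc := by omega
      have hbnd : 0 ≤ m-1-h ∧ m-1-h < m := by
        have := hta.1; have := hta.2; omega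
      have hiff : ((c, h) ∈ bMarked n stks) ↔ (aGet2 (counting m n rows top) (m-1-h) c = 3) := by
        rw [mem_bMarked_iff_remP m n rows top stks htopb' hpad hsc hval (c, h)]
        exact (countingSpec m n rows top htop0 hpad (m-1-h) c hbnd.1 hbnd.2 hc hc2).symm
      simp [hiff]
    rw [List.filter_congr hpred]
    apply List.map_congr_left
    intro h hh
    have hh2 := List.mem_of_mem_filter hh
    rcases PySem.List.mem_pyRange_one.mp hh2 with ⟨hh1, hh3⟩
    rw [hL] at hh3
    exact hval c h hc hc2 hh1 (by omega)
  rw [step1]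
  -- step 2: flip A's top-down segment
  unfold tmpA
  rw [← htc, ← List.map_reverse, ← List.filter_reverse, rev_range tc m, List.filter_map,
    List.map_map]
  have hLe : sLen stks c = m - tc := by
    rw [hL]
    have := hta.1; have := hta.2
    omega
  rw [hLe]
  rfl

-- length bookkeeping: what B deletes in column c is exactly what A's top counter gains
theorem keptB_len (m n : Int) (rows : List (List Char)) (top : List Int)
    (stks : List (List Char)) (c : Int) (hm : 0 ≤ m) (hc : 0 ≤ c) (hc2 : c < n)
    (htopb' : ∀ c : Int, 0 ≤ c → c < n →
      0 ≤ PySem.List.pyGetD top c 0 ∧ PySem.List.pyGetD top c 0 ≤ max m 0)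
    (hpad : ∀ c r : Int, 0 ≤ c → c < n → 0 ≤ r → r < PySem.List.pyGetD top c 0 →
      aCell rows r c = 'a')
    (hsc : ∀ c : Int, 0 ≤ c → c < n →
      (PySem.List.pyGetD stks c []).length = (m - PySem.List.pyGetD top c 0).toNat)
    (hval : ∀ c h : Int, 0 ≤ c → c < n → 0 ≤ h → h < m - PySem.List.pyGetD top c 0 →
      sGet stks c h = aCell rows (m-1-h) c) :
    ((keptB (bMarked n stks) stks c).length : Int)
      = m - PySem.List.pyGetD top c 0 - kA m (counting m n rows top) top c := by
  have hta := htopb' c hc hc2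
  rw [keptB_eq_tmpA m n rows top stks c hm hc hc2 htopb' hpad hsc hval, List.length_reverse]
  have htam : PySem.List.pyGetD top c 0 ≤ m := by
    have := hta.2; omega
  have hpart := List.length_eq_countP_add_countP
    (fun r => decide (aGet2 (counting m n rows top) r c = 3))
    (l := PySem.List.pyRange (PySem.List.pyGetD top c 0) m 1)
  rw [PySem.List.length_pyRange_one] at hpart
  have hcongr : (PySem.List.pyRange (PySem.List.pyGetD top c 0) m 1).countP
        (fun a => decide ¬(decide (aGet2 (counting m n rows top) a c = 3) = true))
      = (PySem.List.pyRange (PySem.List.pyGetD top c 0) m 1).countP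
        (fun r => !(decide (aGet2 (counting m n rows top) r c = 3))) := by
    apply List.countP_congr
    intro a _
    simp
  rw [hcongr] at hpart
  unfold tmpA
  rw [List.length_map, ← List.countP_eq_length_filter]
  have hkdef : kA m (counting m n rows top) top c
      = ((PySem.List.pyRange (PySem.List.pyGetD top c 0) m 1).countP
          (fun r => decide (aGet2 (counting m n rows top) r c = 3)) : Int) := rfl
  rw [hkdef]
  omega

theorem poping_spec (m n : Int) (count : List (List Int)) (rows : List (List Char))
    (top : List Int) (hlen : top.length = n.toNat) (hn : 0 ≤ n) :
    (poping m n count rows top).2.length = top.length ∧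
    (∀ c : Int, 0 ≤ c → c < n →
      PySem.List.pyGetD (poping m n count rows top).2 c 0 = PySem.List.pyGetD top c 0 + kA m count top c) ∧
    (∀ r c : Int, 0 ≤ r → r < m → 0 ≤ c → c < n →
      aCell (poping m n count rows top).1 r c
        = PySem.List.pyGetD (newcolA m count rows top c) r ' ') := by
  have base := popfold_aux m n count rows top (PySem.List.pyRange 0 n 1)
      (top, (PySem.List.pyRange 0 n 1).map (fun _ => ([] : List Char)))
      (PySem.List.nodup_pyRange_one 0 n)
      (fun c hc => PySem.List.mem_pyRange_one.mp hc)
      (fun c _ => rfl)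
      (by rw [hlen]; omega)
      (by rw [List.length_map, PySem.List.length_pyRange_one]; omega)
  refine ⟨base.1, ?_, ?_⟩
  · intro c hc hc2
    exact (base.2.2.1 c (PySem.List.mem_pyRange_one.mpr ⟨hc, hc2⟩)).1
  · intro r c hr hr2 hc hc2
    have hT := touter_aux ((PySem.List.pyRange 0 n 1).foldl (popStep m count rows)
        (top, (PySem.List.pyRange 0 n 1).map (fun _ => ([] : List Char)))).2 m
      (PySem.List.pyRange 0 n 1)
      ((PySem.List.pyRange 0 m 1).map (fun _ => ([] : List Char)))
      (by rw [List.length_map, PySem.List.length_pyRange_one]; omega)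
    show PySem.List.pyGetD (PySem.List.pyGetD
        ((PySem.List.pyRange 0 n 1).foldl
          (tStep ((PySem.List.pyRange 0 n 1).foldl (popStep m count rows)
            (top, (PySem.List.pyRange 0 n 1).map (fun _ => ([] : List Char)))).2 m)
          ((PySem.List.pyRange 0 m 1).map (fun _ => ([] : List Char)))) r []) c ' ' = _
    rw [hT.2 r hr hr2,
      PySem.List.pyGetD_map_pyRange_of_nonneg (fun _ => ([] : List Char)) m r _ hr hr2,
      List.nil_append,
      PySem.List.pyGetD_map_pyRange_of_nonneg _ n c _ hc hc2,
      (base.2.2.1 c (PySem.List.mem_pyRange_one.mpr ⟨hc, hc2⟩)).2]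

theorem StInv_step (m n : Int) (rows : List (List Char)) (top : List Int)
    (stks : List (List Char)) (removed : Int)
    (hinv : StInv m n rows top stks removed)
    (hex : ∃ i j : Int, remP m n rows i j) :
    StInv m n (poping m n (counting m n rows top) rows top).1
      (poping m n (counting m n rows top) rows top).2
      ((PySem.List.pyRange 0 n 1).foldl (bStep (bMarked n stks)) (stks, removed)).1
      ((PySem.List.pyRange 0 n 1).foldl (bStep (bMarked n stks)) (stks, removed)).2 := by
  obtain ⟨hlen, htopb, hpad, hslen, hsc, hval, hsum⟩ := hinv
  obtain ⟨i0, j0, hr0⟩ := hex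
  have hmn : 2 ≤ m ∧ 2 ≤ n := by
    rcases hr0 with h|h|h|h <;> (obtain ⟨a1,a2,a3,a4,-⟩ := h; constructor <;> omega)
  have hmaxm : max m 0 = m := max_eq_left (by omega)
  have htopb' : ∀ c : Int, 0 ≤ c → c < n → 0 ≤ PySem.List.pyGetD top c 0 ∧ PySem.List.pyGetD top c 0 ≤ m := by
    intro c hc hc2
    have h := htopb c hc hc2
    rw [hmaxm] at h
    exact h
  have hk0 : ∀ c : Int, 0 ≤ kA m (counting m n rows top) top c := by
    intro c; unfold kA; exact Int.natCast_nonneg _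
  have hkle : ∀ c : Int, 0 ≤ c → c < n →
      kA m (counting m n rows top) top c ≤ m - PySem.List.pyGetD top c 0 := by
    intro c hc hc2
    have hta := htopb' c hc hc2
    unfold kA
    have h1 := List.countP_le_length
      (p := fun r => decide (aGet2 (counting m n rows top) r c = 3))
      (l := PySem.List.pyRange (PySem.List.pyGetD top c 0) m 1)
    rw [PySem.List.length_pyRange_one] at h1
    omega
  have hklenB : ∀ c : Int, 0 ≤ c → c < n →
      ((keptB (bMarked n stks) stks c).length : Int)
        = m - PySem.List.pyGetD top c 0 - kA m (counting m n rows top) top c :=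
    fun c hc hc2 => keptB_len m n rows top stks c (by omega) hc hc2 htopb hpad hsc hval
  have hkEq : ∀ c : Int, 0 ≤ c → c < n →
      keptB (bMarked n stks) stks c = (tmpA m (counting m n rows top) rows top c).reverse :=
    fun c hc hc2 => keptB_eq_tmpA m n rows top stks c (by omega) hc hc2 htopb hpad hsc hval
  have hPS := poping_spec m n (counting m n rows top) rows top hlen (by omega)
  have hB := bfold_aux n (bMarked n stks) stks (PySem.List.pyRange 0 n 1) (stks, removed)
      (PySem.List.nodup_pyRange_one 0 n) (fun c hc => PySem.List.mem_pyRange_one.mp hc)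
      (fun c _ => rfl) hslen
  refine ⟨?_, ?_, ?_, ?_, ?_, ?_, ?_⟩
  · rw [hPS.1, hlen]
  · intro c hc hc2
    rw [hPS.2.1 c hc hc2]
    have hta := htopb' c hc hc2
    have h1 := hk0 c
    have h2 := hkle c hc hc2
    rw [hmaxm]
    constructor <;> omega
  · intro c r hc hc2 hr hr2
    rw [hPS.2.1 c hc hc2] at hr2
    have hta := htopb' c hc hc2
    have h1 := hk0 c
    have h2 := hkle c hc hc2
    rw [hPS.2.2 r c hr (by omega) hc hc2]
    unfold newcolA
    rw [PySem.List.pyRepeat_singleton]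
    rw [PySem.List.pyGetD_eq_getElem _ _ hr (by
      rw [List.length_append, List.length_replicate]
      push_cast
      omega)]
    rw [List.getElem_append_left (by
      rw [List.length_replicate]
      omega)]
    exact List.getElem_replicate _
  · rw [hB.1]
    exact hslen
  · intro c hc hc2
    rw [hPS.2.1 c hc hc2, hB.2.1 c (PySem.List.mem_pyRange_one.mpr ⟨hc, hc2⟩)]
    have h1 := hk0 c
    have h2 := hkle c hc hc2
    have hta := htopb' c hc hc2
    have h3 := hklenB c hc hc2
    omega
  · intro c h hc hc2 hh hh2
    rw [hPS.2.1 c hc hc2] at hh2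
    have hta := htopb' c hc hc2
    have h1 := hk0 c
    have h2 := hkle c hc hc2
    have h3 := hklenB c hc hc2
    -- LHS: element h of B's new stack = tmpA.reverse[h]
    show PySem.List.pyGetD (PySem.List.pyGetD
        ((PySem.List.pyRange 0 n 1).foldl (bStep (bMarked n stks)) (stks, removed)).1 c []) h '?' = _
    rw [hB.2.1 c (PySem.List.mem_pyRange_one.mpr ⟨hc, hc2⟩), hkEq c hc hc2]
    have hlenT : ((tmpA m (counting m n rows top) rows top c).length : Int)
        = m - PySem.List.pyGetD top c 0 - kA m (counting m n rows top) top c := by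
      rw [← h3, hkEq c hc hc2, List.length_reverse]
    rw [PySem.List.pyGetD_eq_getElem _ _ hh (by
      rw [List.length_reverse]
      omega)]
    rw [List.getElem_reverse]
    -- RHS: newcolA read below the padding
    rw [hPS.2.2 (m-1-h) c (by omega) (by omega) hc hc2]
    unfold newcolA
    rw [PySem.List.pyRepeat_singleton]
    rw [PySem.List.pyGetD_eq_getElem _ _ (by omega : (0:Int) ≤ m-1-h) (by
      rw [List.length_append, List.length_replicate]
      push_cast
      omega)]
    rw [List.getElem_append_right (by
      rw [List.length_replicate]
      omega)]
    congr 1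
    rw [List.length_replicate]
    omega
  · rw [hB.2.2.2]
    have hsum2 : ((PySem.List.pyRange 0 n 1).map
          (fun c => sLen stks c - ((keptB (bMarked n stks) stks c).length : Int))).sum
        = ((PySem.List.pyRange 0 n 1).map
          (fun c => kA m (counting m n rows top) top c)).sum := by
      congr 1
      apply List.map_congr_left
      intro c hcm
      rcases PySem.List.mem_pyRange_one.mp hcm with ⟨hc, hc2⟩
      have hta := htopb' c hc hc2
      have h3 := hklenB c hc hc2
      have hLc : sLen stks c = m - PySem.List.pyGetD top c 0 := by
        unfold sLen
        rw [hsc c hc hc2]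
        omega
      rw [hLc]
      omega
    have hlenP : (poping m n (counting m n rows top) rows top).2.length = n.toNat := by
      rw [hPS.1, hlen]
    have hsumP : (poping m n (counting m n rows top) rows top).2.sum
        = ((PySem.List.pyRange 0 n 1).map
            (fun c => PySem.List.pyGetD top c 0 + kA m (counting m n rows top) top c)).sum := by
      conv_lhs => rw [← PySem.List.map_pyGetD_pyRange_zero
        (poping m n (counting m n rows top) rows top).2 0]
      rw [show PySem.List.len (poping m n (counting m n rows top) rows top).2 = n from by
        rw [PySem.List.len_eq, hlenP]; omega]
      congr 1
      apply List.map_congr_left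
      intro c hcm
      rcases PySem.List.mem_pyRange_one.mp hcm with ⟨hc, hc2⟩
      exact hPS.2.1 c hc hc2
    have hsumT : top.sum = ((PySem.List.pyRange 0 n 1).map (fun c => PySem.List.pyGetD top c 0)).sum := by
      conv_lhs => rw [← PySem.List.map_pyGetD_pyRange_zero top 0]
      rw [show PySem.List.len top = n from by rw [PySem.List.len_eq, hlen]; omega]
    rw [hsum2, hsumP, PySem.List.sum_map_add_int, hsum, hsumT]

theorem loop_eq (m n : Int) : ∀ (fuel : Nat) (rows : List (List Char)) (top : List Int)
    (stks : List (List Char)) (removed : Int), StInv m n rows top stks removed →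
    loopA m n fuel rows top = loopB n fuel stks removed := by
  intro fuel
  induction fuel with
  | zero =>
    intro rows top stks removed hinv
    simp only [loopA, loopB]
    exact hinv.2.2.2.2.2.2.symm
  | succ f ih =>
    intro rows top stks removed hinv
    obtain ⟨hlen, htopb, hpad, hslen, hsc, hval, hsum⟩ := hinv
    have htop0 : ∀ c : Int, 0 ≤ c → c < n → 0 ≤ PySem.List.pyGetD top c 0 :=
      fun c a b => (htopb c a b).1
    have hdone : (isdone m n (counting m n rows top) = true) ↔ bMarked n stks = [] := by
      rw [isdone_iff, bMarked_empty_iff m n rows stks top htopb hpad hsc hval]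
      constructor
      · intro h i j hr
        obtain ⟨b1, b2, b3, b4⟩ := remP_bounds m n rows i j hr
        exact h i j b1 b2 b3 b4 ((countingSpec m n rows top htop0 hpad i j b1 b2 b3 b4).mpr hr)
      · intro h i j hi hi2 hj hj2 hv
        exact h i j ((countingSpec m n rows top htop0 hpad i j hi hi2 hj hj2).mp hv)
    simp only [loopA, loopB]
    by_cases hd : isdone m n (counting m n rows top) = true
    · rw [if_pos hd, if_pos (hdone.mp hd)]
      exact hsum.symm
    · rw [if_neg hd, if_neg (fun h => hd (hdone.mpr h))]
      apply ih
      have hex : ∃ i j : Int, remP m n rows i j := by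
        by_contra hno
        push Not at hno
        apply hd
        rw [isdone_iff]
        intro i j hi hi2 hj hj2 hv
        exact hno i j ((countingSpec m n rows top htop0 hpad i j hi hi2 hj hj2).mp hv)
      exact StInv_step m n rows top stks removed
        ⟨hlen, htopb, hpad, hslen, hsc, hval, hsum⟩ hex

theorem inv_init (m n : Int) (board : List String) :
    StInv m n (board.map (fun s => s.toList))
      ((PySem.List.pyRange 0 n 1).map (fun _ => (0 : Int)))
      ((PySem.List.pyRange 0 n 1).map (fun c =>
        ((PySem.List.pyRange 0 m 1).map (fun r =>
          PySem.List.pyGetD (PySem.List.pyGetD board r "").toList c ' ')).reverse)) 0 := by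
  refine ⟨?_, ?_, ?_, ?_, ?_, ?_, ?_⟩
  · simp [PySem.List.length_pyRange_one]
  · intro c hc hc2
    rw [PySem.List.pyGetD_map_pyRange_of_nonneg _ n c 0 hc hc2]
    exact ⟨le_refl 0, le_max_right m 0⟩
  · intro c r hc hc2 hr hr2
    rw [PySem.List.pyGetD_map_pyRange_of_nonneg _ n c 0 hc hc2] at hr2
    omega
  · rw [List.length_map, PySem.List.length_pyRange_one]
    omega
  · intro c hc hc2
    rw [PySem.List.pyGetD_map_pyRange_of_nonneg _ n c _ hc hc2,
      PySem.List.pyGetD_map_pyRange_of_nonneg _ n c 0 hc hc2,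
      List.length_reverse, List.length_map, PySem.List.length_pyRange_one]
  · intro c h hc hc2 hh hh2
    rw [PySem.List.pyGetD_map_pyRange_of_nonneg _ n c 0 hc hc2] at hh2
    show PySem.List.pyGetD (PySem.List.pyGetD
        ((PySem.List.pyRange 0 n 1).map (fun c =>
          ((PySem.List.pyRange 0 m 1).map (fun r =>
            PySem.List.pyGetD (PySem.List.pyGetD board r "").toList c ' ')).reverse)) c []) h '?' = _
    rw [PySem.List.pyGetD_map_pyRange_of_nonneg _ n c _ hc hc2,
      ← List.map_reverse, rev_range 0 m]
    have e : m - 0 = m := by ring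
    rw [e, List.map_map]
    have e2 : ∀ x : Int, ((fun r => PySem.List.pyGetD (PySem.List.pyGetD board r "").toList c ' ')
        ∘ (fun h => m - 1 - h)) x
        = PySem.List.pyGetD (PySem.List.pyGetD board (m-1-x) "").toList c ' ' := fun x => rfl
    rw [PySem.List.pyGetD_map_pyRange_of_nonneg _ m h '?' hh (by omega)]
    unfold aCell
    simp only [Function.comp]
    have hid : ([] : List Char) = "".toList := rfl
    rw [hid, PySem.List.pyGetD_map (fun s : String => s.toList) board (m-1-h) ""]
  · rw [PySem.List.sum_map_const_int]
    ring

-- ===== VERDICT (by name: the statement is the Claim_ definition above) =====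
theorem solution_spec : Claim_equal_solution := by
  intro m n board _ _
  unfold Spec_solution solution solution_alt
  exact loop_eq m n _ _ _ _ _ (inv_init m n board)
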